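-- pv_equiv track=rewrite | github.com/jaehyeonkim2358/algorithm | baekjoon/2468_02.py | solve
-- ===== SOURCE A (Python) =====
-- from collections import deque
--
-- def solve(_map, h):
--     size = len(_map)
--     mmap = [[False] * size for _ in range(size)]
--     move = ((1,0), (0,1), (-1,0), (0,-1))
--
--     def check(x, y):
--         if x < 0 or x >= size: return False
--         if y < 0 or y >= size: return False
--         return True
--
--     def _bfs(mmap, r, c):
--         q = deque([(r, c)])
--         mmap[r][c] = True
--         while q:
--             y, x = q.popleft()
--             for dy, dx in move:
--                 if check(y+dy, x+dx) and not mmap[y+dy][x+dx] and _map[y+dy][x+dx] > h: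
--                     mmap[y+dy][x+dx] = True
--                     q.append((y+dy, x+dx))
--
--     count = 0
--     for i in range(size):
--         for j in range(size):
--             if not mmap[i][j] and _map[i][j] > h:
--                 _bfs(mmap, i, j)
--                 count += 1
--     return count
-- ===== SOURCE B (Python) =====
-- def solve(_map, h):
--     size = len(_map)
--     n = size * size
--     label = [-1] * n
--     members = [[] for _ in range(n)]
--     for k in range(n):
--         if _map[k // size][k % size] > h:
--             label[k] = k
--             members[k] = [k]
--
--     def union(a, b):
--         la, lb = label[a], label[b]
--         if la == lb:
--             return
--         if lb < la:
--             la, lb = lb, la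
--         for x in members[lb]:
--             label[x] = la
--         members[la] = members[la] + members[lb]
--         members[lb] = []
--
--     for i in range(size):
--         for j in range(size):
--             if _map[i][j] > h:
--                 k = i * size + j
--                 if j + 1 < size and _map[i][j + 1] > h:
--                     union(k, k + 1)
--                 if i + 1 < size and _map[i + 1][j] > h:
--                     union(k, k + size)
--
--     return sum(1 for k in range(n) if label[k] == k)
-- ===== Notes on version B (the rewrite author's own statement) =====
-- stated objective: alternative
-- what changed: Replaces A's BFS flood fill with a visited grid by union-find in quick-find form: every flooded cell starts as its own labelled class, one pass over the grid unions each flooded cell with its flooded right and down neighbours (relabelling only the merged class, whose members are tracked per label, with the smaller label winning), and the answer is the number of flooded cells that remain their own label (class roots).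
import Mathlib
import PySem

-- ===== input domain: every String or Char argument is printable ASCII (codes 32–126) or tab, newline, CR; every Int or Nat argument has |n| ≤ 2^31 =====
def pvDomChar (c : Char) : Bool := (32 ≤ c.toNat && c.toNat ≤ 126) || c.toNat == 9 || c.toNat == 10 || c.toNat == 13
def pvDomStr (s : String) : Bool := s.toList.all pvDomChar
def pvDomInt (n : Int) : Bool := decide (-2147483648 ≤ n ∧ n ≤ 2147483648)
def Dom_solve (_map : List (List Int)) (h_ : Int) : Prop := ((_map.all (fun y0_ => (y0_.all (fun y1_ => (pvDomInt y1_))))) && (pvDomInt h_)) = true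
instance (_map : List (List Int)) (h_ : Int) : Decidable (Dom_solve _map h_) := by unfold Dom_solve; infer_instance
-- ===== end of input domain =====

-- B replaces A's BFS flood fill (queue + visited grid) by union-find in quick-find form: each
-- flooded cell starts as its own labelled class, one pass unions every flooded cell with its
-- flooded right/down neighbours (relabelling only the merged class, smaller label wins), and the
-- answer is the number of flooded cells still carrying their own label ("alternative"; no speed
-- claim). A mutates nothing observable by the caller; the equivalence is about the return value.

-- ===== PORT A =====
-- _map[y][x] / mmap[y][x] reads and mmap[y][x] = True: exact for 0 ≤ y, x < size (guaranteed by
-- `check` / the range loops together with Pre_solve), the only way A uses them.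
def solveGetV (g : List (List Int)) (y x : Int) : Int := (g.getD y.toNat []).getD x.toNat 0

def solveGetM (m : List (List Bool)) (y x : Int) : Bool := (m.getD y.toNat []).getD x.toNat false

def solveSetM (m : List (List Bool)) (y x : Int) : List (List Bool) :=
  m.set y.toNat ((m.getD y.toNat []).set x.toNat true)

def solveCheck (size : Nat) (x y : Int) : Bool :=
  if x < 0 || (size : Int) ≤ x then false
  else if y < 0 || (size : Int) ≤ y then false
  else true

def solveMove : List (Int × Int) := [(1, 0), (0, 1), (-1, 0), (0, -1)]

-- the `while q:` loop of _bfs; `fuel` is only a totality guard (2*size*size + 2 provably suffices)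
def solveBfs (g : List (List Int)) (h_ : Int) (size : Nat) :
    Nat → List (List Bool) → List (Int × Int) → List (List Bool)
  | 0, m, _ => m
  | _ + 1, m, [] => m
  | fuel + 1, m, (y, x) :: q =>
      let st := solveMove.foldl (fun (st : List (List Bool) × List (Int × Int)) d =>
        if solveCheck size (y + d.1) (x + d.2) && !solveGetM st.1 (y + d.1) (x + d.2) &&
            decide (solveGetV g (y + d.1) (x + d.2) > h_) then
          (solveSetM st.1 (y + d.1) (x + d.2), st.2 ++ [(y + d.1, x + d.2)])
        else st) (m, q)
      solveBfs g h_ size fuel st.1 st.2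

def solve (_map : List (List Int)) (h_ : Int) : Int :=
  let size := _map.length
  let mmap : List (List Bool) := List.replicate size (List.replicate size false)
  let st := (PySem.List.pyRange 0 size 1).foldl (fun st i =>
    (PySem.List.pyRange 0 size 1).foldl (fun (st : List (List Bool) × Int) j =>
      if !solveGetM st.1 i j && decide (solveGetV _map i j > h_) then
        (solveBfs _map h_ size (2 * size * size + 2) (solveSetM st.1 i j) [(i, j)], st.2 + 1)
      else st) st) (mmap, (0 : Int))
  st.2

-- ===== PORT B =====
-- label[k] / members[k] accesses only happen at indices < size*size (list lengths are preserved),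
-- where getD is exact.
def altVal (g : List (List Int)) (y x : Int) : Int :=
  ((g[y.toNat]?.getD [])[x.toNat]?).getD 0

-- the `union(a, b)` helper: relabel the class with the larger label, move its member list
def altUnion (st : List Int × List (List Nat)) (a b : Nat) : List Int × List (List Nat) :=
  let la := st.1.getD a 0
  let lb := st.1.getD b 0
  if la = lb then st
  else
    let r := if lb < la then lb else la
    let s := if lb < la then la else lb
    let lst := st.2.getD s.toNat []
    (lst.foldl (fun lab x => lab.set x r) st.1,
     (st.2.set r.toNat (st.2.getD r.toNat [] ++ lst)).set s.toNat [])

def solve_alt (_map : List (List Int)) (h_ : Int) : Int :=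
  let size := _map.length
  let n := size * size
  let init : List Int × List (List Nat) :=
    (List.range n).foldl (fun st k =>
      if altVal _map ((k / size : Nat) : Int) ((k % size : Nat) : Int) > h_ then
        (st.1.set k (k : Int), st.2.set k [k])
      else st)
      (List.replicate n (-1), List.replicate n ([] : List Nat))
  let st := (List.range size).foldl (fun st (i : Nat) =>
    (List.range size).foldl (fun st (j : Nat) =>
      if altVal _map (i : Int) (j : Int) > h_ then
        let k : Nat := i * size + j
        let st1 := if j + 1 < size ∧ altVal _map (i : Int) ((j : Int) + 1) > h_ then
          altUnion st k (k + 1) else st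
        if i + 1 < size ∧ altVal _map ((i : Int) + 1) (j : Int) > h_ then
          altUnion st1 k (k + size) else st1
      else st) st) init
  ((List.range n).countP (fun k => st.1.getD k 0 == (k : Int)) : Int)

-- ===== PRECONDITION & SPEC =====
-- Pre_solve: the Python A reads _map[i][j] for every i, j < len(_map), so it raises IndexError
-- exactly when some row is shorter than len(_map); those inputs (and only those) are excluded.
def Pre_solve (_map : List (List Int)) (h_ : Int) : Prop :=
  ∀ row ∈ _map, _map.length ≤ row.length
instance (_map : List (List Int)) (h_ : Int) : Decidable (Pre_solve _map h_) := by
  unfold Pre_solve; infer_instance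

def pvWitness_solve : List (List Int) × Int := ([[2, 1], [1, 2]], 1)

def Spec_solve (_map : List (List Int)) (h_ : Int) (out : Int) : Prop := out = solve_alt _map h_
instance (_map : List (List Int)) (h_ : Int) (out : Int) : Decidable (Spec_solve _map h_ out) := by
  unfold Spec_solve; infer_instance

-- ===== CLAIM (what is proved, stated in full; the proofs are below) =====
def Claim_equal_solve : Prop := ∀ (_map : List (List Int)) (h_ : Int), Dom_solve _map h_ →
  Pre_solve _map h_ → Spec_solve _map h_ (solve _map h_)

-- ===== LEMMAS AND PROOFS =====

-- ---- abstract layer (shared) ----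
def pvIn (size : Nat) (p : Int × Int) : Prop :=
  0 ≤ p.1 ∧ p.1 < (size : Int) ∧ 0 ≤ p.2 ∧ p.2 < (size : Int)

def pvShape (size : Nat) (m : List (List Bool)) : Prop :=
  m.length = size ∧ ∀ r ∈ m, r.length = size

def pvMarked (size : Nat) (m : List (List Bool)) (p : Int × Int) : Prop :=
  pvIn size p ∧ solveGetM m p.1 p.2 = true

def pvFlood (g : List (List Int)) (h_ : Int) (size : Nat) (p : Int × Int) : Prop :=
  pvIn size p ∧ solveGetV g p.1 p.2 > h_

def pvAdj (c p : Int × Int) : Prop :=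
  p = (c.1 + 1, c.2) ∨ p = (c.1, c.2 + 1) ∨ p = (c.1 + -1, c.2) ∨ p = (c.1, c.2 + -1)

def pvStep (g : List (List Int)) (h_ : Int) (size : Nat) (M0 : List (List Bool))
    (c p : Int × Int) : Prop :=
  pvAdj c p ∧ pvFlood g h_ size p ∧ ¬ pvMarked size M0 p

def pvReach (g : List (List Int)) (h_ : Int) (size : Nat) (M0 : List (List Bool))
    (s p : Int × Int) : Prop :=
  Relation.ReflTransGen (pvStep g h_ size M0) s p

def pvFc (m : List (List Bool)) : Nat := (m.map (fun r => r.countP (fun b => !b))).sum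

-- connectivity in the flooded subgraph (independent of any visited state)
def pvStepF (g : List (List Int)) (h_ : Int) (size : Nat) (c p : Int × Int) : Prop :=
  pvAdj c p ∧ pvFlood g h_ size p

def pvConn (g : List (List Int)) (h_ : Int) (size : Nat) (s p : Int × Int) : Prop :=
  pvFlood g h_ size s ∧ Relation.ReflTransGen (pvStepF g h_ size) s p

-- linear index k ↦ its cell, and the canonical (minimal-index) cells of components
def pvPair (size k : Nat) : Int × Int := (((k / size : Nat) : Int), ((k % size : Nat) : Int))

def pvFK (g : List (List Int)) (h_ : Int) (size k : Nat) : Prop :=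
  pvFlood g h_ size (pvPair size k)

def pvCanon (g : List (List Int)) (h_ : Int) (size : Nat) (k : Nat) : Prop :=
  pvFK g h_ size k ∧ ∀ m, m < k → ¬ pvConn g h_ size (pvPair size m) (pvPair size k)

noncomputable def pvCdec (g : List (List Int)) (h_ : Int) (size k : Nat) : Bool :=
  @decide (pvCanon g h_ size k) (Classical.propDecidable _)

noncomputable def pvN (g : List (List Int)) (h_ : Int) (size : Nat) : Nat :=
  (List.range (size * size)).countP (pvCdec g h_ size)

-- ---- data lemmas (A side) ----
theorem pvMarked_set (size : Nat) (m : List (List Bool)) (r : Int × Int)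
    (hs : pvShape size m) (hr : pvIn size r) (p : Int × Int) :
    pvMarked size (solveSetM m r.1 r.2) p ↔ (p = r ∨ pvMarked size m p) := by
  obtain ⟨hlen, hrow⟩ := hs
  obtain ⟨h1, h2, h3, h4⟩ := hr
  by_cases hp : pvIn size p
  · obtain ⟨p1, p2, p3, p4⟩ := hp
    have hri : r.1.toNat < m.length := by omega
    have hpi : p.1.toNat < m.length := by omega
    have hrow_r : (m[r.1.toNat]).length = size := hrow _ (List.getElem_mem _)
    have hrow_p : (m[p.1.toNat]).length = size := hrow _ (List.getElem_mem _)
    have hgd : m.getD r.1.toNat [] = m[r.1.toNat] := by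
      simp [List.getD_eq_getElem?_getD, List.getElem?_eq_getElem, hri]
    constructor
    · rintro ⟨-, hm⟩
      by_cases hpr : p = r
      · exact Or.inl hpr
      · refine Or.inr ⟨⟨p1, p2, p3, p4⟩, ?_⟩
        rw [← hm]
        simp only [solveGetM, solveSetM, hgd, List.getD_eq_getElem?_getD, List.getElem?_set]
        by_cases hy : r.1.toNat = p.1.toNat
        · have hx : r.2.toNat ≠ p.2.toNat := by
            intro hc
            exact hpr (Prod.ext (by omega) (by omega))
          simp [hy, hpi, List.getElem?_set, hx]
        · simp [hy]
    · rintro (rfl | ⟨-, hm⟩)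
      · refine ⟨⟨h1, h2, h3, h4⟩, ?_⟩
        simp only [solveGetM, solveSetM, hgd, List.getD_eq_getElem?_getD, List.getElem?_set]
        have hb : p.2.toNat < m[p.1.toNat].length := by omega
        simp [hri, hb]
      · refine ⟨⟨p1, p2, p3, p4⟩, ?_⟩
        rw [← hm]
        simp only [solveGetM, solveSetM, hgd, List.getD_eq_getElem?_getD, List.getElem?_set]
        by_cases hy : r.1.toNat = p.1.toNat
        · by_cases hx : r.2.toNat = p.2.toNat
          · have hb : p.2.toNat < m[p.1.toNat].length := by omega
            have hmv : (m[p.1.toNat])[p.2.toNat]'hb = true := by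
              simpa [solveGetM, List.getD_eq_getElem?_getD, List.getElem?_eq_getElem, hpi, hb] using hm
            simp [hy, hx, List.getElem?_set, hpi, hb, List.getElem?_eq_getElem, hmv]
          · simp [hy, hpi, hx]
        · simp [hy]
  · constructor
    · rintro ⟨hin, -⟩
      exact absurd hin hp
    · rintro (rfl | ⟨hin, -⟩)
      · exact absurd ⟨h1, h2, h3, h4⟩ hp
      · exact absurd hin hp

theorem pvShape_set (size : Nat) (m : List (List Bool)) (r : Int × Int)
    (hs : pvShape size m) (hr : pvIn size r) : pvShape size (solveSetM m r.1 r.2) := by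
  obtain ⟨hlen, hrow⟩ := hs
  refine ⟨by simp [solveSetM, hlen], ?_⟩
  intro row hm
  rcases List.mem_or_eq_of_mem_set hm with h | rfl
  · exact hrow _ h
  · rw [List.length_set]
    have : r.1.toNat < m.length := by obtain ⟨_, _, _, _⟩ := hr; omega
    have : m.getD r.1.toNat [] = m[r.1.toNat] := by
      simp [List.getD_eq_getElem?_getD, List.getElem?_eq_getElem, this]
    rw [this]
    exact hrow _ (List.getElem_mem _)

theorem pvCountP_set_false (row : List Bool) (j : Nat) (hj : j < row.length)
    (hf : row[j] = false) :
    (row.set j true).countP (fun b => !b) + 1 = row.countP (fun b => !b) := by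
  induction row generalizing j with
  | nil => simp at hj
  | cons b t ih =>
    cases j with
    | zero => simp_all [List.countP_cons]
    | succ j =>
      simp only [List.set_cons_succ, List.countP_cons]
      have := ih j (by simpa using hj) (by simpa using hf)
      omega

theorem pvSum_map_set (f : List Bool → Nat) (l : List (List Bool)) (i : Nat) (a : List Bool)
    (hi : i < l.length) :
    ((l.set i a).map f).sum + f (l[i]) = (l.map f).sum + f a := by
  induction l generalizing i with
  | nil => simp at hi
  | cons b t ih =>
    cases i with
    | zero => simp; omega
    | succ i =>
      simp only [List.set_cons_succ, List.map_cons, List.sum_cons, List.getElem_cons_succ]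
      have := ih i (by simpa using hi)
      omega

theorem pvFc_set (size : Nat) (m : List (List Bool)) (r : Int × Int)
    (hs : pvShape size m) (hr : pvIn size r) (hnm : ¬ pvMarked size m r) :
    pvFc (solveSetM m r.1 r.2) + 1 = pvFc m := by
  obtain ⟨hlen, hrow⟩ := hs
  obtain ⟨h1, h2, h3, h4⟩ := hr
  have hri : r.1.toNat < m.length := by omega
  have hgd : m.getD r.1.toNat [] = m[r.1.toNat] := by
    simp [List.getD_eq_getElem?_getD, List.getElem?_eq_getElem, hri]
  have hrl : (m[r.1.toNat]).length = size := hrow _ (List.getElem_mem _)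
  have hb : r.2.toNat < (m[r.1.toNat]).length := by omega
  have hent : (m[r.1.toNat])[r.2.toNat]'hb = false := by
    by_contra hcon
    apply hnm
    refine ⟨⟨h1, h2, h3, h4⟩, ?_⟩
    simp only [solveGetM, List.getD_eq_getElem?_getD, List.getElem?_eq_getElem, hri, hb,
      Option.getD_some]
    simpa using hcon
  have hrowc := pvCountP_set_false (m[r.1.toNat]) r.2.toNat hb hent
  have hsum := pvSum_map_set (fun row => row.countP (fun b => !b)) m r.1.toNat
    ((m.getD r.1.toNat []).set r.2.toNat true) hri
  simp only [pvFc, solveSetM, hgd] at *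
  omega

theorem pvFc_le (size : Nat) (m : List (List Bool)) (hs : pvShape size m) :
    pvFc m ≤ size * size := by
  obtain ⟨hlen, hrow⟩ := hs
  have : ∀ x ∈ m.map (fun r => r.countP (fun b => !b)), x ≤ size := by
    intro x hx
    obtain ⟨row, hm, rfl⟩ := List.mem_map.1 hx
    exact le_trans List.countP_le_length (le_of_eq (hrow _ hm))
  calc pvFc m ≤ (m.map (fun r => r.countP (fun b => !b))).length * size :=
        List.sum_le_card_nsmul _ _ this
    _ = size * size := by simp [hlen, Nat.mul_comm]

theorem pvShape_init (size : Nat) :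
    pvShape size (List.replicate size (List.replicate size false)) := by
  constructor
  · simp
  · intro r hr
    simp [List.eq_of_mem_replicate hr]

theorem pvMarked_init (size : Nat) (p : Int × Int) :
    ¬ pvMarked size (List.replicate size (List.replicate size false)) p := by
  rintro ⟨⟨h1, h2, h3, h4⟩, hm⟩
  have hi : p.1.toNat < size := by omega
  have : solveGetM (List.replicate size (List.replicate size false)) p.1 p.2 = false := by
    by_cases hj : p.2.toNat < size <;>
      simp [solveGetM, List.getD_eq_getElem?_getD, List.getElem?_replicate, hi, hj]
  rw [this] at hm
  exact Bool.false_ne_true hm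

def pvPost (g : List (List Int)) (h_ : Int) (size : Nat) (m : List (List Bool))
    (q : List (Int × Int)) (st' : List (List Bool) × List (Int × Int))
    (R : Int × Int → Prop) : Prop :=
  pvShape size st'.1 ∧
  (∀ p, pvMarked size st'.1 p ↔
    (pvMarked size m p ∨ (R p ∧ pvFlood g h_ size p ∧ ¬ pvMarked size m p))) ∧
  (∀ p, p ∈ st'.2 ↔ (p ∈ q ∨ (R p ∧ pvFlood g h_ size p ∧ ¬ pvMarked size m p))) ∧
  2 * pvFc st'.1 + st'.2.length ≤ 2 * pvFc m + q.length

theorem pvPost_base (g : List (List Int)) (h_ : Int) (size : Nat) (m : List (List Bool))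
    (q : List (Int × Int)) (hs : pvShape size m) :
    pvPost g h_ size m q (m, q) (fun _ => False) := by
  refine ⟨hs, fun p => by simp, fun p => by simp, Nat.le_refl _⟩

theorem pvStepPost (g : List (List Int)) (h_ : Int) (size : Nat) (m : List (List Bool))
    (q : List (Int × Int)) (r : Int × Int) (cond : Bool) (q' : List (Int × Int))
    (hs : pvShape size m)
    (hcond : cond = true ↔ (pvFlood g h_ size r ∧ ¬ pvMarked size m r))
    (hmem : ∀ p, p ∈ q' ↔ (p ∈ q ∨ p = r))
    (hlen : q'.length = q.length + 1) :
    pvPost g h_ size m q (if cond then (solveSetM m r.1 r.2, q') else (m, q))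
      (fun p => p = r) := by
  cases cond with
  | true =>
    obtain ⟨hfl, hnm⟩ := hcond.1 rfl
    have hrin : pvIn size r := hfl.1
    rw [if_pos rfl]
    refine ⟨pvShape_set size m r hs hrin, ?_, ?_, ?_⟩
    · intro p
      rw [pvMarked_set size m r hs hrin]
      simp only []
      by_cases hpr : p = r <;> [subst hpr; skip] <;> tauto
    · intro p
      rw [hmem]
      simp only []
      by_cases hpr : p = r <;> [subst hpr; skip] <;> tauto
    · have := pvFc_set size m r hs hrin hnm
      simp only []
      omega
  | false =>
    have hnot : ¬ (pvFlood g h_ size r ∧ ¬ pvMarked size m r) := by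
      rw [← hcond]; simp
    rw [if_neg (by simp)]
    refine ⟨hs, ?_, ?_, Nat.le_refl _⟩
    · intro p
      simp only []
      by_cases hpr : p = r <;> [subst hpr; skip] <;> tauto
    · intro p
      simp only []
      by_cases hpr : p = r <;> [subst hpr; skip] <;> tauto

theorem pvPost_comp (g : List (List Int)) (h_ : Int) (size : Nat) (m : List (List Bool))
    (q : List (Int × Int)) (st : List (List Bool) × List (Int × Int))
    (R : Int × Int → Prop) (r : Int × Int) (cond : Bool) (q' : List (Int × Int))
    (hpost : pvPost g h_ size m q st R)
    (hcond : cond = true ↔ (pvFlood g h_ size r ∧ ¬ pvMarked size st.1 r))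
    (hmem : ∀ p, p ∈ q' ↔ (p ∈ st.2 ∨ p = r))
    (hlen : q'.length = st.2.length + 1)
    (hnr : ¬ R r) :
    pvPost g h_ size m q (if cond then (solveSetM st.1 r.1 r.2, q') else st)
      (fun p => R p ∨ p = r) := by
  obtain ⟨hs', hmk, hmm, hms⟩ := hpost
  have hstep := pvStepPost g h_ size st.1 st.2 r cond q' hs' hcond hmem hlen
  obtain ⟨gs, gmk, gmm, gms⟩ := hstep
  have hre : (if cond then (solveSetM st.1 r.1 r.2, q') else (st.1, st.2)) =
      (if cond then (solveSetM st.1 r.1 r.2, q') else st) := by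
    cases cond <;> simp
  rw [hre] at gs gmk gmm gms
  have hmr : pvMarked size st.1 r ↔ pvMarked size m r := by
    rw [hmk r]
    constructor
    · rintro (h | ⟨hR, -, -⟩)
      · exact h
      · exact absurd hR hnr
    · exact fun h => Or.inl h
  refine ⟨gs, ?_, ?_, by omega⟩
  · intro p
    rw [gmk p, hmk p]
    simp only []
    by_cases hpr : p = r
    · subst hpr
      tauto
    · tauto
  · intro p
    rw [gmm p, hmm p]
    simp only []
    by_cases hpr : p = r
    · subst hpr
      tauto
    · tauto

theorem pvPost_congr (g : List (List Int)) (h_ : Int) (size : Nat) (m : List (List Bool))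
    (q : List (Int × Int)) (st : List (List Bool) × List (Int × Int))
    (R R' : Int × Int → Prop) (hpost : pvPost g h_ size m q st R)
    (hRR : ∀ p, R p ↔ R' p) : pvPost g h_ size m q st R' := by
  obtain ⟨hs, hmk, hmm, hms⟩ := hpost
  exact ⟨hs, fun p => by rw [hmk p, hRR p], fun p => by rw [hmm p, hRR p], hms⟩

theorem pvCheck_iff (size : Nat) (x y : Int) :
    (solveCheck size x y = true) ↔ (0 ≤ x ∧ x < (size : Int) ∧ 0 ≤ y ∧ y < (size : Int)) := by
  unfold solveCheck
  split_ifs with h1 h2 <;> simp_all <;> omega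

theorem pvCond_iff (g : List (List Int)) (h_ : Int) (size : Nat) (m : List (List Bool))
    (r : Int × Int) (hs : pvShape size m) (ok : Bool) (hok : ok = true ↔ pvIn size r) :
    ((ok && !solveGetM m r.1 r.2 && decide (solveGetV g r.1 r.2 > h_)) = true)
      ↔ (pvFlood g h_ size r ∧ ¬ pvMarked size m r) := by
  by_cases hin : pvIn size r
  · have hokt : ok = true := hok.2 hin
    have hmk : solveGetM m r.1 r.2 = true ↔ pvMarked size m r :=
      ⟨fun h => ⟨hin, h⟩, fun h => h.2⟩
    constructor
    · intro hc
      simp only [hokt, Bool.true_and, Bool.and_eq_true, Bool.not_eq_true',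
        decide_eq_true_eq] at hc
      refine ⟨⟨hin, hc.2⟩, ?_⟩
      intro hmm
      rw [← hmk] at hmm
      rw [hc.1] at hmm
      exact Bool.false_ne_true hmm
    · rintro ⟨⟨-, hv⟩, hnm⟩
      have hgf : solveGetM m r.1 r.2 = false := by
        cases hgm : solveGetM m r.1 r.2 with
        | false => rfl
        | true => exact absurd (hmk.1 hgm) hnm
      simp [hokt, hgf, hv]
  · have hokf : ok = false := by
      cases hko : ok with
      | false => rfl
      | true => exact absurd (hok.1 hko) hin
    constructor
    · intro hc
      rw [hokf] at hc
      simp at hc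
    · rintro ⟨⟨hin', -⟩, -⟩
      exact absurd hin' hin

theorem pvLoop_spec (g : List (List Int)) (h_ : Int) (size : Nat)
    (loop : Nat → List (List Bool) → List (Int × Int) → List (List Bool))
    (M0 : List (List Bool)) (s : Int × Int)
    (Hnil : ∀ fuel m, loop (fuel + 1) m [] = m)
    (Hcons : ∀ fuel m c q, pvShape size m → pvIn size c →
      ∃ st', loop (fuel + 1) m (c :: q) = loop fuel st'.1 st'.2 ∧
        pvPost g h_ size m q st' (pvAdj c))
    (hM0 : pvShape size M0) (hs0 : ¬ pvMarked size M0 s) :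
    ∀ fuel m q, pvShape size m →
    (∀ p, pvMarked size M0 p → pvMarked size m p) →
    (∀ p, pvMarked size m p → pvMarked size M0 p ∨ pvReach g h_ size M0 s p) →
    (∀ p ∈ q, pvMarked size m p) →
    (∀ p ∈ q, pvReach g h_ size M0 s p) →
    pvMarked size m s →
    (∀ p, pvMarked size m p → ¬ pvMarked size M0 p → p ∉ q →
      ∀ r, pvAdj p r → pvFlood g h_ size r → ¬ pvMarked size M0 r → pvMarked size m r) →
    2 * pvFc m + q.length < fuel →
    pvShape size (loop fuel m q) ∧
      (∀ p, pvMarked size (loop fuel m q) p ↔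
        (pvMarked size M0 p ∨ pvReach g h_ size M0 s p)) := by
  intro fuel
  induction fuel with
  | zero => intro m q _ _ _ _ _ _ _ hfu; omega
  | succ fuel ih =>
    intro m q hsh hsub hcover hqm hqr hms hfront hfu
    cases q with
    | nil =>
      rw [Hnil]
      refine ⟨hsh, ?_⟩
      have key : ∀ p, pvReach g h_ size M0 s p →
          pvMarked size m p ∧ (p = s ∨ ¬ pvMarked size M0 p) := by
        intro p hr
        induction hr with
        | refl => exact ⟨hms, Or.inl rfl⟩
        | @tail b c' hsb hstep ihr =>
          obtain ⟨hadj, hfl, hnm0⟩ := hstep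
          have hb0 : ¬ pvMarked size M0 b := by
            rcases ihr.2 with rfl | hh
            · exact hs0
            · exact hh
          exact ⟨hfront b ihr.1 hb0 (by simp) c' hadj hfl hnm0, Or.inr hnm0⟩
      intro p
      constructor
      · exact fun h => hcover p h
      · rintro (h | h)
        · exact hsub p h
        · exact (key p h).1
    | cons c q =>
      have hcin : pvIn size c := (hqm c (List.mem_cons_self)).1
      obtain ⟨st', heq, hpost⟩ := Hcons fuel m c q hsh hcin
      obtain ⟨gs, gmk, gmm, gms⟩ := hpost
      rw [heq]
      have hreach_new : ∀ p, pvAdj c p → pvFlood g h_ size p → ¬ pvMarked size m p →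
          pvReach g h_ size M0 s p := by
        intro p hadj hfl hnm
        have hnm0 : ¬ pvMarked size M0 p := fun h => hnm (hsub p h)
        exact Relation.ReflTransGen.tail (hqr c (List.mem_cons_self)) ⟨hadj, hfl, hnm0⟩
      apply ih st'.1 st'.2 gs
      · intro p h
        rw [gmk p]
        exact Or.inl (hsub p h)
      · intro p h
        rw [gmk p] at h
        rcases h with h | ⟨hadj, hfl, hnm⟩
        · exact hcover p h
        · exact Or.inr (hreach_new p hadj hfl hnm)
      · intro p hp
        rw [gmm p] at hp
        rw [gmk p]
        rcases hp with hp | hnew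
        · exact Or.inl (hqm p (List.mem_cons_of_mem _ hp))
        · exact Or.inr hnew
      · intro p hp
        rw [gmm p] at hp
        rcases hp with hp | ⟨hadj, hfl, hnm⟩
        · exact hqr p (List.mem_cons_of_mem _ hp)
        · exact hreach_new p hadj hfl hnm
      · rw [gmk s]
        exact Or.inl hms
      · intro p hp hnp0 hpq r hadj hfl hnr0
        rw [gmk p] at hp
        rw [gmk r]
        rcases hp with hp | hnew
        · by_cases hmr : pvMarked size m r
          · exact Or.inl hmr
          · by_cases hpc : p = c
            · subst hpc
              exact Or.inr ⟨hadj, hfl, hmr⟩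
            · have hpnq : p ∉ q := by
                intro hin
                exact hpq ((gmm p).2 (Or.inl hin))
              have hpncq : p ∉ c :: q := by
                intro hin
                rcases List.mem_cons.1 hin with h | h
                · exact hpc h
                · exact hpnq h
              exact Or.inl (hfront p hp hnp0 hpncq r hadj hfl hnr0)
        · exfalso
          exact hpq ((gmm p).2 (Or.inr hnew))
      · have : st'.2.length ≤ q.length + 1 + (2 * pvFc m - 2 * pvFc st'.1) := by omega
        simp only [List.length_cons] at hfu
        omega

theorem pvFour (g : List (List Int)) (h_ : Int) (size : Nat) (m : List (List Bool))
    (q : List (Int × Int)) (c : Int × Int)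
    (push : List (Int × Int) → (Int × Int) → List (Int × Int))
    (hpush : ∀ l r, (∀ p, p ∈ push l r ↔ (p ∈ l ∨ p = r)) ∧ (push l r).length = l.length + 1)
    (ok1 ok2 ok3 ok4 : Bool) (r1 r2 r3 r4 : Int × Int)
    (hsh : pvShape size m)
    (hok1 : ok1 = true ↔ pvIn size r1) (hok2 : ok2 = true ↔ pvIn size r2)
    (hok3 : ok3 = true ↔ pvIn size r3) (hok4 : ok4 = true ↔ pvIn size r4)
    (hd21 : r2 ≠ r1) (hd31 : r3 ≠ r1) (hd32 : r3 ≠ r2)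
    (hd41 : r4 ≠ r1) (hd42 : r4 ≠ r2) (hd43 : r4 ≠ r3)
    (hadj : ∀ p, pvAdj c p ↔ (((p = r1 ∨ p = r2) ∨ p = r3) ∨ p = r4)) :
    pvPost g h_ size m q
      ((fun st => if ok4 && !solveGetM st.1 r4.1 r4.2 && decide (solveGetV g r4.1 r4.2 > h_) then
          (solveSetM st.1 r4.1 r4.2, push st.2 r4) else st)
       ((fun st => if ok3 && !solveGetM st.1 r3.1 r3.2 && decide (solveGetV g r3.1 r3.2 > h_) then
          (solveSetM st.1 r3.1 r3.2, push st.2 r3) else st)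
        ((fun st => if ok2 && !solveGetM st.1 r2.1 r2.2 && decide (solveGetV g r2.1 r2.2 > h_) then
          (solveSetM st.1 r2.1 r2.2, push st.2 r2) else st)
         ((fun st => if ok1 && !solveGetM st.1 r1.1 r1.2 && decide (solveGetV g r1.1 r1.2 > h_) then
          (solveSetM st.1 r1.1 r1.2, push st.2 r1) else st) (m, q)))))
      (pvAdj c) := by
  simp only []
  have h0 := pvPost_base g h_ size m q hsh
  have h1 := pvPost_comp g h_ size m q (m, q) (fun _ => False) r1 _ _ h0
    (pvCond_iff g h_ size m r1 hsh ok1 hok1)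
    (fun p => ((hpush q r1).1 p)) ((hpush q r1).2) not_false
  have h2 := pvPost_comp g h_ size m q _ _ r2 _ _ h1
    (pvCond_iff g h_ size _ r2 h1.1 ok2 hok2)
    (fun p => ((hpush _ r2).1 p)) ((hpush _ r2).2)
    (by rintro (h | h); exact h; exact hd21 h)
  have h3 := pvPost_comp g h_ size m q _ _ r3 _ _ h2
    (pvCond_iff g h_ size _ r3 h2.1 ok3 hok3)
    (fun p => ((hpush _ r3).1 p)) ((hpush _ r3).2)
    (by rintro ((h | h) | h); exact h; exact hd31 h; exact hd32 h)
  have h4 := pvPost_comp g h_ size m q _ _ r4 _ _ h3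
    (pvCond_iff g h_ size _ r4 h3.1 ok4 hok4)
    (fun p => ((hpush _ r4).1 p)) ((hpush _ r4).2)
    (by rintro (((h | h) | h) | h); exact h; exact hd41 h; exact hd42 h; exact hd43 h)
  refine pvPost_congr g h_ size m q _ _ _ h4 ?_
  intro p
  rw [hadj p]
  tauto

set_option maxHeartbeats 1000000 in
theorem pvBfs_hcons (g : List (List Int)) (h_ : Int) (size : Nat) :
    ∀ fuel m c q, pvShape size m → pvIn size c →
      ∃ st', solveBfs g h_ size (fuel + 1) m (c :: q) = solveBfs g h_ size fuel st'.1 st'.2 ∧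
        pvPost g h_ size m q st' (pvAdj c) := by
  rintro fuel m ⟨y, x⟩ q hsh hcin
  refine ⟨solveMove.foldl (fun (st : List (List Bool) × List (Int × Int)) d =>
      if solveCheck size (y + d.1) (x + d.2) && !solveGetM st.1 (y + d.1) (x + d.2) &&
          decide (solveGetV g (y + d.1) (x + d.2) > h_) then
        (solveSetM st.1 (y + d.1) (x + d.2), st.2 ++ [(y + d.1, x + d.2)])
      else st) (m, q), ?_, ?_⟩
  · rw [solveBfs]
  simp only [solveMove, List.foldl_cons, List.foldl_nil, add_zero]
  exact pvFour g h_ size m q (y, x) (fun l r => l ++ [r])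
    (fun l r => ⟨fun p => by simp, by simp⟩)
    (solveCheck size (y + 1) x) (solveCheck size y (x + 1))
    (solveCheck size (y + -1) x) (solveCheck size y (x + -1))
    ((y + 1, x)) ((y, x + 1)) ((y + -1, x)) ((y, x + -1)) hsh
    (by simpa [pvIn] using pvCheck_iff size (y + 1) x)
    (by simpa [pvIn] using pvCheck_iff size y (x + 1))
    (by simpa [pvIn] using pvCheck_iff size (y + -1) x)
    (by simpa [pvIn] using pvCheck_iff size y (x + -1))
    (by simp [Prod.ext_iff]; try omega) (by simp [Prod.ext_iff]; try omega)
    (by simp [Prod.ext_iff]; try omega) (by simp [Prod.ext_iff]; try omega)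
    (by simp [Prod.ext_iff]; try omega) (by simp [Prod.ext_iff]; try omega)
    (fun p => by unfold pvAdj; tauto)

theorem pvFill (g : List (List Int)) (h_ : Int) (size : Nat)
    (loop : Nat → List (List Bool) → List (Int × Int) → List (List Bool))
    (M0 : List (List Bool)) (s : Int × Int)
    (Hnil : ∀ fuel m, loop (fuel + 1) m [] = m)
    (Hcons : ∀ fuel m c q, pvShape size m → pvIn size c →
      ∃ st', loop (fuel + 1) m (c :: q) = loop fuel st'.1 st'.2 ∧
        pvPost g h_ size m q st' (pvAdj c))
    (hM0 : pvShape size M0) (hfl : pvFlood g h_ size s) (hnm : ¬ pvMarked size M0 s) :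
    pvShape size (loop (2 * size * size + 2) (solveSetM M0 s.1 s.2) [s]) ∧
    (∀ p, pvMarked size (loop (2 * size * size + 2) (solveSetM M0 s.1 s.2) [s]) p ↔
      (pvMarked size M0 p ∨ pvReach g h_ size M0 s p)) := by
  have hin := hfl.1
  have hset := pvMarked_set size M0 s hM0 hin
  have hsh' := pvShape_set size M0 s hM0 hin
  have hms : pvMarked size (solveSetM M0 s.1 s.2) s := (hset s).2 (Or.inl rfl)
  apply pvLoop_spec g h_ size loop M0 s Hnil Hcons hM0 hnm _ _ _ hsh'
  · intro p h
    exact (hset p).2 (Or.inr h)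
  · intro p h
    rcases (hset p).1 h with rfl | h
    · exact Or.inr Relation.ReflTransGen.refl
    · exact Or.inl h
  · intro p hp
    rw [List.mem_singleton] at hp
    subst hp
    exact hms
  · intro p hp
    rw [List.mem_singleton] at hp
    subst hp
    exact Relation.ReflTransGen.refl
  · exact hms
  · intro p hp hnp0 hpq r _ _ _
    exfalso
    rcases (hset p).1 hp with rfl | h
    · exact hpq (List.mem_singleton.2 rfl)
    · exact hnp0 h
  · have h1 := pvFc_set size M0 s hM0 hin hnm
    have h2 := pvFc_le size M0 hM0
    have h3 : 2 * size * size = 2 * (size * size) := by ring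
    simp only [List.length_cons, List.length_nil]
    omega

-- ---- connectivity lemmas ----
theorem pvAdj_symm (a b : Int × Int) : pvAdj a b ↔ pvAdj b a := by
  obtain ⟨a1, a2⟩ := a
  obtain ⟨b1, b2⟩ := b
  simp only [pvAdj, Prod.ext_iff]
  constructor <;> intro h <;> rcases h with ⟨h1, h2⟩ | ⟨h1, h2⟩ | ⟨h1, h2⟩ | ⟨h1, h2⟩
  · exact Or.inr (Or.inr (Or.inl ⟨by omega, by omega⟩))
  · exact Or.inr (Or.inr (Or.inr ⟨by omega, by omega⟩))
  · exact Or.inl ⟨by omega, by omega⟩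
  · exact Or.inr (Or.inl ⟨by omega, by omega⟩)
  · exact Or.inr (Or.inr (Or.inl ⟨by omega, by omega⟩))
  · exact Or.inr (Or.inr (Or.inr ⟨by omega, by omega⟩))
  · exact Or.inl ⟨by omega, by omega⟩
  · exact Or.inr (Or.inl ⟨by omega, by omega⟩)

theorem pvConn_flood (g : List (List Int)) (h_ : Int) (size : Nat) (s p : Int × Int)
    (h : pvConn g h_ size s p) : pvFlood g h_ size p := by
  obtain ⟨hs, hr⟩ := h
  induction hr with
  | refl => exact hs
  | tail _ hstep _ => exact hstep.2

theorem pvConn_symm (g : List (List Int)) (h_ : Int) (size : Nat) (s p : Int × Int)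
    (h : pvConn g h_ size s p) : pvConn g h_ size p s := by
  obtain ⟨hs, hr⟩ := h
  refine ⟨pvConn_flood g h_ size s p ⟨hs, hr⟩, ?_⟩
  induction hr with
  | refl => exact Relation.ReflTransGen.refl
  | @tail b c hsb hstep ihr =>
    have hfb : pvFlood g h_ size b := pvConn_flood g h_ size s b ⟨hs, hsb⟩
    exact Relation.ReflTransGen.head ⟨(pvAdj_symm b c).1 hstep.1, hfb⟩ ihr

theorem pvConn_trans (g : List (List Int)) (h_ : Int) (size : Nat) (s p q : Int × Int)
    (h1 : pvConn g h_ size s p) (h2 : pvConn g h_ size p q) : pvConn g h_ size s q :=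
  ⟨h1.1, Relation.ReflTransGen.trans h1.2 h2.2⟩

def pvClosed (g : List (List Int)) (h_ : Int) (size : Nat) (M : List (List Bool)) : Prop :=
  (∀ p, pvMarked size M p → pvFlood g h_ size p) ∧
  (∀ p q, pvMarked size M p → pvAdj p q → pvFlood g h_ size q → pvMarked size M q)

theorem pvReach_iff (g : List (List Int)) (h_ : Int) (size : Nat) (M : List (List Bool))
    (s : Int × Int) (hcl : pvClosed g h_ size M) (hfs : pvFlood g h_ size s)
    (hnm : ¬ pvMarked size M s) (p : Int × Int) :
    pvReach g h_ size M s p ↔ Relation.ReflTransGen (pvStepF g h_ size) s p := by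
  constructor
  · intro h
    exact Relation.ReflTransGen.mono (fun a b hab => ⟨hab.1, hab.2.1⟩) h
  · intro h
    suffices hs : pvReach g h_ size M s p ∧ ¬ pvMarked size M p ∧ pvFlood g h_ size p by
      exact hs.1
    induction h with
    | refl => exact ⟨Relation.ReflTransGen.refl, hnm, hfs⟩
    | @tail b c hsb hstep ihr =>
      obtain ⟨hr, hnb, hfb⟩ := ihr
      have hnc : ¬ pvMarked size M c := by
        intro hc
        exact hnb (hcl.2 c b hc ((pvAdj_symm b c).1 hstep.1) hfb)
      exact ⟨Relation.ReflTransGen.tail hr ⟨hstep.1, hstep.2, hnc⟩, hnc, hstep.2⟩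

-- ---- A-side: the scan counts canonical cells ----
-- cells in row-major order
def pvCells (size : Nat) : List (Int × Int) :=
  (PySem.List.pyRange 0 size 1).flatMap
    (fun i => (PySem.List.pyRange 0 size 1).map (fun j => (i, j)))

theorem pvFoldl_flatMap {α β γ : Type} (l : List α) (f : α → List β) (g : γ → β → γ)
    (init : γ) :
    (l.flatMap f).foldl g init = l.foldl (fun st a => (f a).foldl g st) init := by
  induction l generalizing init with
  | nil => rfl
  | cons a l ih => simp [List.foldl_append, ih]

theorem pvRowsNat (n : Nat) (hn : 0 < n) (r : Nat) :
    (List.range (r * n)).map (fun k => (((k / n : Nat) : Int), ((k % n : Nat) : Int)))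
      = (List.range r).flatMap
          (fun (i : Nat) => (List.range n).map (fun (j : Nat) => ((i : Int), (j : Int)))) := by
  induction r with
  | zero => simp
  | succ r ih =>
    rw [Nat.succ_mul, List.range_add, List.map_append, ih, List.range_succ,
      List.flatMap_append, List.map_map]
    congr 1
    simp only [List.flatMap_singleton, List.map_map]
    apply List.map_congr_left
    intro j hj
    rw [List.mem_range] at hj
    have hd : (r * n + j) / n = r := by
      rw [Nat.add_comm, Nat.mul_comm, Nat.add_mul_div_left _ _ hn]
      simp [Nat.div_eq_of_lt hj]
    have hm : (r * n + j) % n = j := by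
      rw [Nat.add_comm, Nat.mul_comm, Nat.add_mul_mod_self_left, Nat.mod_eq_of_lt hj]
    simp [Function.comp, hd, hm]

theorem pvCells_eq (size : Nat) :
    pvCells size = (List.range (size * size)).map (pvPair size) := by
  rcases Nat.eq_zero_or_pos size with rfl | hn
  · simp [pvCells, PySem.List.pyRange_one]
  · simp only [pvCells, PySem.List.pyRange_one, sub_zero, Int.toNat_natCast, List.map_map,
      List.flatMap_map, Function.comp_def, zero_add]
    rw [← pvRowsNat size hn size]
    rfl

def pvBodyA (g : List (List Int)) (h_ : Int) (size : Nat)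
    (st : List (List Bool) × Int) (c : Int × Int) : List (List Bool) × Int :=
  if !solveGetM st.1 c.1 c.2 && decide (solveGetV g c.1 c.2 > h_) then
    (solveBfs g h_ size (2 * size * size + 2) (solveSetM st.1 c.1 c.2) [c], st.2 + 1)
  else st

theorem pvBodyA_eq (g : List (List Int)) (h_ : Int) (size : Nat)
    (st : List (List Bool) × Int) (c : Int × Int) :
    pvBodyA g h_ size st c =
      if (!solveGetM st.1 c.1 c.2 && decide (solveGetV g c.1 c.2 > h_)) = true then
        (solveBfs g h_ size (2 * size * size + 2) (solveSetM st.1 c.1 c.2) [c], st.2 + 1)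
      else st := rfl

theorem pvSolveA (g : List (List Int)) (h_ : Int) :
    solve g h_ = ((pvCells g.length).foldl (pvBodyA g h_ g.length)
      (List.replicate g.length (List.replicate g.length false), 0)).2 := by
  rw [pvCells, pvFoldl_flatMap]
  simp only [List.foldl_map]
  rfl

theorem pvPair_in (size k : Nat) (hk : k < size * size) : pvIn size (pvPair size k) := by
  have hs : 0 < size := by
    rcases Nat.eq_zero_or_pos size with rfl | h
    · omega
    · exact h
  have h1 : k / size < size := Nat.div_lt_iff_lt_mul hs |>.2 hk
  have h2 : k % size < size := Nat.mod_lt _ hs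
  refine ⟨?_, ?_, ?_, ?_⟩
  · show (0 : Int) ≤ ((k / size : Nat) : Int)
    exact Int.natCast_nonneg _
  · show ((k / size : Nat) : Int) < ((size : Nat) : Int)
    exact_mod_cast h1
  · show (0 : Int) ≤ ((k % size : Nat) : Int)
    exact Int.natCast_nonneg _
  · show ((k % size : Nat) : Int) < ((size : Nat) : Int)
    exact_mod_cast h2

theorem pvScanA (g : List (List Int)) (h_ : Int) (size : Nat) :
    ∀ K, K ≤ size * size →
    pvShape size ((List.range K).foldl (fun st k => pvBodyA g h_ size st (pvPair size k))
      (List.replicate size (List.replicate size false), 0)).1 ∧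
    (∀ p, pvMarked size ((List.range K).foldl (fun st k => pvBodyA g h_ size st (pvPair size k))
      (List.replicate size (List.replicate size false), 0)).1 p ↔
      ∃ m, m < K ∧ pvConn g h_ size (pvPair size m) p) ∧
    ((List.range K).foldl (fun st k => pvBodyA g h_ size st (pvPair size k))
      (List.replicate size (List.replicate size false), 0)).2
      = (((List.range K).countP (pvCdec g h_ size) : Nat) : Int) := by
  intro K
  induction K with
  | zero =>
    simp only [List.range_zero, List.foldl_nil, List.countP_nil]
    intro _
    refine ⟨pvShape_init size, ?_, by simp⟩
    intro p
    constructor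
    · intro h
      exact absurd h (pvMarked_init size p)
    · rintro ⟨m, hm, -⟩
      omega
  | succ K ih =>
    intro hK1
    obtain ⟨hsh, hmk, hcnt⟩ := ih (by omega)
    simp only [List.range_succ, List.foldl_append, List.foldl_cons, List.foldl_nil]
    have hKn : K < size * size := by omega
    have hin : pvIn size (pvPair size K) := pvPair_in size K hKn
    have hcond := pvCond_iff g h_ size
      ((List.range K).foldl (fun st k => pvBodyA g h_ size st (pvPair size k))
        (List.replicate size (List.replicate size false), 0)).1 (pvPair size K) hsh true
      ⟨fun _ => hin, fun _ => rfl⟩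
    rw [Bool.true_and] at hcond
    have hclosed : pvClosed g h_ size
        ((List.range K).foldl (fun st k => pvBodyA g h_ size st (pvPair size k))
          (List.replicate size (List.replicate size false), 0)).1 := by
      constructor
      · intro p hp
        obtain ⟨m, hm, hconn⟩ := (hmk p).1 hp
        exact pvConn_flood g h_ size _ p hconn
      · intro p q hp hadj hfq
        obtain ⟨m, hm, hconn⟩ := (hmk p).1 hp
        exact (hmk q).2 ⟨m, hm, pvConn_trans g h_ size _ p q hconn
          ⟨pvConn_flood g h_ size _ p hconn, Relation.ReflTransGen.single ⟨hadj, hfq⟩⟩⟩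
    rw [pvBodyA_eq]
    by_cases hcnd : pvFlood g h_ size (pvPair size K) ∧ ¬ pvMarked size
        ((List.range K).foldl (fun st k => pvBodyA g h_ size st (pvPair size k))
          (List.replicate size (List.replicate size false), 0)).1 (pvPair size K)
    · rw [if_pos (hcond.2 hcnd)]
      obtain ⟨hfl, hnm⟩ := hcnd
      have hfill := pvFill g h_ size (solveBfs g h_ size) _ (pvPair size K)
        (fun fuel m => by rw [solveBfs]) (pvBfs_hcons g h_ size) hsh hfl hnm
      refine ⟨hfill.1, ?_, ?_⟩
      · intro p
        rw [hfill.2 p, pvReach_iff g h_ size _ (pvPair size K) hclosed hfl hnm p]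
        constructor
        · rintro (hp | hr)
          · obtain ⟨m, hm, hconn⟩ := (hmk p).1 hp
            exact ⟨m, by omega, hconn⟩
          · exact ⟨K, by omega, hfl, hr⟩
        · rintro ⟨m, hm, hconn⟩
          rcases Nat.lt_succ_iff_lt_or_eq.1 hm with h | rfl
          · exact Or.inl ((hmk p).2 ⟨m, h, hconn⟩)
          · exact Or.inr hconn.2
      · simp only []
        rw [hcnt]
        have hcanon : pvCanon g h_ size K := by
          refine ⟨hfl, ?_⟩
          intro m hm hconn
          exact hnm ((hmk (pvPair size K)).2 ⟨m, hm, hconn⟩)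
        have hdec : pvCdec g h_ size K = true := by
          simp only [pvCdec, decide_eq_true_eq]
          exact hcanon
        simp only [List.countP_append, List.countP_cons, List.countP_nil, hdec]
        push_cast
        ring
    · rw [if_neg (fun h => hcnd (hcond.1 h))]
      have hmc : pvFlood g h_ size (pvPair size K) → pvMarked size
          ((List.range K).foldl (fun st k => pvBodyA g h_ size st (pvPair size k))
            (List.replicate size (List.replicate size false), 0)).1 (pvPair size K) := by
        intro hfl
        by_contra hx
        exact hcnd ⟨hfl, hx⟩
      refine ⟨hsh, ?_, ?_⟩
      · intro p
        rw [hmk p]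
        constructor
        · rintro ⟨m, hm, hconn⟩
          exact ⟨m, by omega, hconn⟩
        · rintro ⟨m, hm, hconn⟩
          rcases Nat.lt_succ_iff_lt_or_eq.1 hm with h | rfl
          · exact ⟨m, h, hconn⟩
          · obtain ⟨m0, hm0, hconn0⟩ := (hmk (pvPair size m)).1 (hmc hconn.1)
            exact ⟨m0, by omega, pvConn_trans g h_ size _ (pvPair size m) p hconn0 hconn⟩
      · rw [hcnt]
        have hncanon : ¬ pvCanon g h_ size K := by
          rintro ⟨hfl, hcan⟩
          obtain ⟨m0, hm0, hconn0⟩ := (hmk (pvPair size K)).1 (hmc hfl)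
          exact hcan m0 hm0 hconn0
        have hdec : pvCdec g h_ size K = false := by
          simp only [pvCdec, decide_eq_false_iff_not]
          exact hncanon
        simp [List.countP_append, List.countP_cons, List.countP_nil, hdec]

theorem pvA_eq (g : List (List Int)) (h_ : Int) :
    solve g h_ = ((pvN g h_ g.length : Nat) : Int) := by
  rw [pvSolveA, pvCells_eq, List.foldl_map]
  exact (pvScanA g h_ g.length (g.length * g.length) (le_refl _)).2.2

-- ---- B-side: generic symmetric-closure machinery ----
def pvSym (S : Nat → Nat → Prop) (a b : Nat) : Prop := S a b ∨ S b a

def pvCE (S : Nat → Nat → Prop) (a b : Nat) : Prop :=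
  Relation.ReflTransGen (pvSym S) a b

def pvAddE (S : Nat → Nat → Prop) (u v : Nat) (a b : Nat) : Prop :=
  S a b ∨ (a = u ∧ b = v)

def pvNoE : Nat → Nat → Prop := fun _ _ => False

theorem pvCE_mono (S S' : Nat → Nat → Prop) (h : ∀ a b, S a b → S' a b) (a b : Nat)
    (hab : pvCE S a b) : pvCE S' a b :=
  Relation.ReflTransGen.mono (fun x y hxy => hxy.imp (h x y) (h y x)) hab

theorem pvCE_congr (S S' : Nat → Nat → Prop) (h : ∀ a b, S a b ↔ S' a b) (a b : Nat) :
    pvCE S a b ↔ pvCE S' a b :=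
  ⟨pvCE_mono S S' (fun x y => (h x y).1) a b, pvCE_mono S' S (fun x y => (h x y).2) a b⟩

theorem pvCE_symm (S : Nat → Nat → Prop) (a b : Nat) (h : pvCE S a b) : pvCE S b a :=
  Relation.ReflTransGen.symmetric (fun x y hxy => hxy.symm) h

theorem pvCE_add_iff (S : Nat → Nat → Prop) (u v a b : Nat) :
    pvCE (pvAddE S u v) a b ↔
      pvCE S a b ∨ (pvCE S a u ∧ pvCE S v b) ∨ (pvCE S a v ∧ pvCE S u b) := by
  constructor
  · intro h
    induction h with
    | refl => exact Or.inl Relation.ReflTransGen.refl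
    | @tail p q hap hpq ih =>
      have ext : pvCE S p q →
          (pvCE S a p ∨ (pvCE S a u ∧ pvCE S v p) ∨ (pvCE S a v ∧ pvCE S u p)) →
          (pvCE S a q ∨ (pvCE S a u ∧ pvCE S v q) ∨ (pvCE S a v ∧ pvCE S u q)) := by
        rintro hstep (h1 | ⟨h1, h2⟩ | ⟨h1, h2⟩)
        · exact Or.inl (Relation.ReflTransGen.trans h1 hstep)
        · exact Or.inr (Or.inl ⟨h1, Relation.ReflTransGen.trans h2 hstep⟩)
        · exact Or.inr (Or.inr ⟨h1, Relation.ReflTransGen.trans h2 hstep⟩)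
      rcases hpq with (hS | ⟨rfl, rfl⟩) | (hS | ⟨rfl, rfl⟩)
      · exact ext (Relation.ReflTransGen.single (Or.inl hS)) ih
      · rcases ih with h1 | ⟨h1, h2⟩ | ⟨h1, h2⟩
        · exact Or.inr (Or.inl ⟨h1, Relation.ReflTransGen.refl⟩)
        · exact Or.inr (Or.inl ⟨h1, Relation.ReflTransGen.refl⟩)
        · exact Or.inl h1
      · exact ext (Relation.ReflTransGen.single (Or.inr hS)) ih
      · rcases ih with h1 | ⟨h1, h2⟩ | ⟨h1, h2⟩
        · exact Or.inr (Or.inr ⟨h1, Relation.ReflTransGen.refl⟩)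
        · exact Or.inl h1
        · exact Or.inr (Or.inr ⟨h1, Relation.ReflTransGen.refl⟩)
  · have hmono : ∀ x y, pvCE S x y → pvCE (pvAddE S u v) x y :=
      pvCE_mono S _ (fun x y h => Or.inl h)
    have huv : pvCE (pvAddE S u v) u v :=
      Relation.ReflTransGen.single (Or.inl (Or.inr ⟨rfl, rfl⟩))
    rintro (h1 | ⟨h1, h2⟩ | ⟨h1, h2⟩)
    · exact hmono _ _ h1
    · exact Relation.ReflTransGen.trans (hmono _ _ h1)
        (Relation.ReflTransGen.trans huv (hmono _ _ h2))
    · exact Relation.ReflTransGen.trans (hmono _ _ h1)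
        (Relation.ReflTransGen.trans (pvCE_symm _ u v huv) (hmono _ _ h2))

theorem pvCE_isolated (S : Nat → Nat → Prop) (a : Nat) (ha : ∀ b, ¬ pvSym S a b) (m : Nat)
    (h : pvCE S a m) : m = a := by
  rcases Relation.ReflTransGen.cases_head h with rfl | ⟨b, hab, _⟩
  · rfl
  · exact absurd hab (ha b)

-- class minima
noncomputable def pvMu (S : Nat → Nat → Prop) (k : Nat) : Nat := sInf {m | pvCE S k m}

theorem pvMu_mem (S : Nat → Nat → Prop) (k : Nat) : pvCE S k (pvMu S k) :=
  Nat.sInf_mem ⟨k, Relation.ReflTransGen.refl⟩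

theorem pvMu_le (S : Nat → Nat → Prop) (k m : Nat) (h : pvCE S k m) : pvMu S k ≤ m :=
  Nat.sInf_le h

theorem pvMu_le_self (S : Nat → Nat → Prop) (k : Nat) : pvMu S k ≤ k :=
  pvMu_le S k k Relation.ReflTransGen.refl

theorem pvMu_eq_of_class_eq (S S' : Nat → Nat → Prop) (k : Nat)
    (h : ∀ m, pvCE S k m ↔ pvCE S' k m) : pvMu S k = pvMu S' k := by
  unfold pvMu
  congr 1
  ext m
  exact h m

theorem pvMu_congr (S : Nat → Nat → Prop) (k k' : Nat) (h : pvCE S k k') :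
    pvMu S k = pvMu S k' := by
  unfold pvMu
  congr 1
  ext m
  exact ⟨fun hm => Relation.ReflTransGen.trans (pvCE_symm S k k' h) hm,
    fun hm => Relation.ReflTransGen.trans h hm⟩

theorem pvMu_eq_iff_conn (S : Nat → Nat → Prop) (k m : Nat) :
    pvCE S k m ↔ pvMu S k = pvMu S m :=
  ⟨pvMu_congr S k m, fun h => by
    have h1 := pvMu_mem S k
    have h2 := pvMu_mem S m
    rw [h] at h1
    exact Relation.ReflTransGen.trans h1 (pvCE_symm S m (pvMu S m) h2)⟩

theorem pvMu_noE (k : Nat) : pvMu pvNoE k = k := by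
  have h1 : pvMu pvNoE k ≤ k := pvMu_le_self pvNoE k
  have h2 := pvMu_mem pvNoE k
  have := pvCE_isolated pvNoE k (fun b hb => by cases hb <;> assumption) _ h2
  omega

-- ---- B-side: invariant for the union-find state ----
def pvInvB (g : List (List Int)) (h_ : Int) (size n : Nat) (S : Nat → Nat → Prop)
    (st : List Int × List (List Nat)) : Prop :=
  st.1.length = n ∧ st.2.length = n ∧
  (∀ k, k < n → ¬ pvFK g h_ size k → st.1.getD k 0 = -1) ∧
  (∀ k, k < n → pvFK g h_ size k → st.1.getD k 0 = ((pvMu S k : Nat) : Int)) ∧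
  (∀ r x, x ∈ st.2.getD r [] ↔ (x < n ∧ pvFK g h_ size x ∧ pvMu S x = r))

theorem pvInvB_congr (g : List (List Int)) (h_ : Int) (size n : Nat)
    (S S' : Nat → Nat → Prop) (h : ∀ a b, S a b ↔ S' a b)
    (st : List Int × List (List Nat)) (hinv : pvInvB g h_ size n S st) :
    pvInvB g h_ size n S' st := by
  have hmu : ∀ k, pvMu S k = pvMu S' k := fun k =>
    pvMu_eq_of_class_eq S S' k (fun m => pvCE_congr S S' h k m)
  obtain ⟨h1, h2, h3, h4, h5⟩ := hinv
  exact ⟨h1, h2, h3, fun k hk hf => by rw [← hmu k]; exact h4 k hk hf,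
    fun r x => by rw [h5 r x, hmu x]⟩

theorem pvGetD_set (l : List (List Nat)) (i : Nat) (a : List Nat) (j : Nat) :
    (l.set i a).getD j [] = if i = j ∧ i < l.length then a else l.getD j [] := by
  simp only [List.getD_eq_getElem?_getD, List.getElem?_set]
  split_ifs with h1 h2 h3 h3 <;> simp_all <;> omega

theorem pvGetD_set_int (l : List Int) (i : Nat) (a : Int) (j : Nat) :
    (l.set i a).getD j 0 = if i = j ∧ i < l.length then a else l.getD j 0 := by
  simp only [List.getD_eq_getElem?_getD, List.getElem?_set]
  split_ifs with h1 h2 h3 h3 <;> simp_all <;> omega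

theorem pvFoldSet_getD (lst : List Nat) (lab : List Int) (v : Int) (k : Nat) :
    (lst.foldl (fun l x => l.set x v) lab).getD k 0 =
      if k ∈ lst ∧ k < lab.length then v else lab.getD k 0 := by
  induction lst generalizing lab with
  | nil => simp
  | cons x t ih =>
    simp only [List.foldl_cons, ih, List.length_set, pvGetD_set_int, List.mem_cons]
    by_cases hkt : k ∈ t <;> by_cases hkx : x = k <;> by_cases hkl : k < lab.length <;>
      simp_all [eq_comm]

theorem pvFoldSet_length (lst : List Nat) (lab : List Int) (v : Int) :
    (lst.foldl (fun l x => l.set x v) lab).length = lab.length := by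
  induction lst generalizing lab with
  | nil => rfl
  | cons x t ih => simp [ih]

theorem pvMerge_inv (g : List (List Int)) (h_ : Int) (size n : Nat)
    (S : Nat → Nat → Prop) (st : List Int × List (List Nat))
    (hinv : pvInvB g h_ size n S st) (a b : Nat) (ha : a < n) (hb : b < n)
    (rN sN : Nat)
    (hor : (rN = pvMu S a ∧ sN = pvMu S b) ∨ (rN = pvMu S b ∧ sN = pvMu S a))
    (hlt : rN < sN) :
    pvInvB g h_ size n (pvAddE S a b)
      (((st.2.getD sN []).foldl (fun lab x => lab.set x ((rN : Nat) : Int)) st.1),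
       ((st.2.set rN (st.2.getD rN [] ++ st.2.getD sN [])).set sN [])) := by
  obtain ⟨hl1, hl2, hlab0, hlab, hmem⟩ := hinv
  have hab' : pvCE (pvAddE S a b) a b :=
    Relation.ReflTransGen.single (Or.inl (Or.inr ⟨rfl, rfl⟩))
  have hCa := pvMu_mem S a
  have hCb := pvMu_mem S b
  have hμa : pvMu S a < n := lt_of_le_of_lt (pvMu_le_self S a) ha
  have hμb : pvMu S b < n := lt_of_le_of_lt (pvMu_le_self S b) hb
  have hrn : rN < n := by rcases hor with ⟨h1, -⟩ | ⟨h1, -⟩ <;> omega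
  have hsn : sN < n := by rcases hor with ⟨-, h1⟩ | ⟨-, h1⟩ <;> omega
  have hmono : ∀ x y, pvCE S x y → pvCE (pvAddE S a b) x y :=
    pvCE_mono S _ (fun x y h => Or.inl h)
  have hmerge : ∀ k, (pvCE S k a ∨ pvCE S k b) ↔ (pvMu S k = rN ∨ pvMu S k = sN) := by
    intro k
    rw [pvMu_eq_iff_conn S k a, pvMu_eq_iff_conn S k b]
    rcases hor with ⟨h1, h2⟩ | ⟨h1, h2⟩ <;> constructor <;> rintro (h | h) <;> omega
  have F1 : ∀ k, (pvCE S k a ∨ pvCE S k b) → pvMu (pvAddE S a b) k = rN := by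
    intro k hk
    have hka : pvCE (pvAddE S a b) k a := by
      rcases hk with h | h
      · exact hmono k a h
      · exact Relation.ReflTransGen.trans (hmono k b h) (pvCE_symm _ a b hab')
    have hmemr : pvCE (pvAddE S a b) k rN := by
      rcases hor with ⟨hr, -⟩ | ⟨hr, -⟩
      · rw [hr]
        exact Relation.ReflTransGen.trans hka (hmono a _ hCa)
      · rw [hr]
        exact Relation.ReflTransGen.trans hka
          (Relation.ReflTransGen.trans hab' (hmono b _ hCb))
    apply Nat.le_antisymm
    · exact Nat.sInf_le hmemr
    · have hne : {m | pvCE (pvAddE S a b) k m}.Nonempty := ⟨k, Relation.ReflTransGen.refl⟩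
      have hmm := Nat.sInf_mem hne
      have hall : ∀ m, pvCE (pvAddE S a b) k m → rN ≤ m := by
        intro m hm
        rw [pvCE_add_iff] at hm
        have hbound : pvMu S a ≤ m ∨ pvMu S b ≤ m := by
          rcases hm with h | ⟨h1, h2⟩ | ⟨h1, h2⟩
          · rcases hk with hka' | hkb'
            · exact Or.inl (pvMu_le S a m (Relation.ReflTransGen.trans (pvCE_symm S k a hka') h))
            · exact Or.inr (pvMu_le S b m (Relation.ReflTransGen.trans (pvCE_symm S k b hkb') h))
          · exact Or.inr (pvMu_le S b m h2)
          · exact Or.inl (pvMu_le S a m h2)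
        rcases hor with ⟨h1, h2⟩ | ⟨h1, h2⟩ <;> omega
      exact hall _ hmm
  have F2 : ∀ k, ¬ (pvCE S k a ∨ pvCE S k b) → pvMu (pvAddE S a b) k = pvMu S k := by
    intro k hk
    apply pvMu_eq_of_class_eq
    intro m
    rw [pvCE_add_iff]
    constructor
    · rintro (h | ⟨h1, h2⟩ | ⟨h1, h2⟩)
      · exact h
      · exact absurd (Or.inl h1) hk
      · exact absurd (Or.inr h1) hk
    · exact fun h => Or.inl h
  have hlst : ∀ x, x ∈ st.2.getD sN [] ↔ (x < n ∧ pvFK g h_ size x ∧ pvMu S x = sN) :=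
    fun x => hmem sN x
  refine ⟨?_, ?_, ?_, ?_, ?_⟩
  · rw [pvFoldSet_length]
    exact hl1
  · simp [List.length_set, hl2]
  · intro k hk hnf
    rw [pvFoldSet_getD, if_neg (fun h => hnf ((hlst k).1 h.1).2.1)]
    exact hlab0 k hk hnf
  · intro k hk hf
    rw [pvFoldSet_getD]
    by_cases hks : pvMu S k = sN
    · rw [if_pos ⟨(hlst k).2 ⟨hk, hf, hks⟩, by rw [hl1]; exact hk⟩,
        F1 k ((hmerge k).2 (Or.inr hks))]
    · rw [if_neg (fun h => hks ((hlst k).1 h.1).2.2), hlab k hk hf]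
      by_cases hkr : pvMu S k = rN
      · rw [F1 k ((hmerge k).2 (Or.inl hkr)), hkr]
      · have hnm : ¬ (pvCE S k a ∨ pvCE S k b) := by
          intro h
          rcases (hmerge k).1 h with h' | h'
          · exact hkr h'
          · exact hks h'
        rw [F2 k hnm]
  · intro r x
    rw [pvGetD_set]
    by_cases hrs : sN = r
    · rw [if_pos ⟨hrs, by rw [List.length_set, hl2]; exact hsn⟩]
      simp only [List.not_mem_nil, false_iff]
      rintro ⟨hxn, hfx, hmu⟩
      by_cases hx : pvCE S x a ∨ pvCE S x b
      · rw [F1 x hx] at hmu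
        omega
      · rw [F2 x hx] at hmu
        exact hx ((hmerge x).2 (Or.inr (by omega)))
    · rw [if_neg (fun h => hrs h.1), pvGetD_set]
      by_cases hrr : rN = r
      · rw [if_pos ⟨hrr, by rw [hl2]; exact hrn⟩, List.mem_append]
        constructor
        · rintro (hx | hx)
          · obtain ⟨hxn, hfx, hmu⟩ := (hmem rN x).1 hx
            exact ⟨hxn, hfx, by rw [F1 x ((hmerge x).2 (Or.inl hmu))]; omega⟩
          · obtain ⟨hxn, hfx, hmu⟩ := (hlst x).1 hx
            exact ⟨hxn, hfx, by rw [F1 x ((hmerge x).2 (Or.inr hmu))]; omega⟩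
        · rintro ⟨hxn, hfx, hmu⟩
          by_cases hx : pvCE S x a ∨ pvCE S x b
          · rcases (hmerge x).1 hx with h' | h'
            · exact Or.inl ((hmem rN x).2 ⟨hxn, hfx, h'⟩)
            · exact Or.inr ((hlst x).2 ⟨hxn, hfx, h'⟩)
          · rw [F2 x hx] at hmu
            exact Or.inl ((hmem rN x).2 ⟨hxn, hfx, by omega⟩)
      · rw [if_neg (fun h => hrr h.1), hmem r x]
        constructor
        · rintro ⟨hxn, hfx, hmu⟩
          refine ⟨hxn, hfx, ?_⟩
          have hx : ¬ (pvCE S x a ∨ pvCE S x b) := by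
            intro hx
            rcases (hmerge x).1 hx with h' | h' <;> omega
          rw [F2 x hx]
          exact hmu
        · rintro ⟨hxn, hfx, hmu⟩
          refine ⟨hxn, hfx, ?_⟩
          by_cases hx : pvCE S x a ∨ pvCE S x b
          · rw [F1 x hx] at hmu
            omega
          · rw [F2 x hx] at hmu
            exact hmu

theorem pvUnion_inv (g : List (List Int)) (h_ : Int) (size n : Nat)
    (S : Nat → Nat → Prop) (st : List Int × List (List Nat))
    (hinv : pvInvB g h_ size n S st) (a b : Nat) (ha : a < n) (hb : b < n)
    (hfa : pvFK g h_ size a) (hfb : pvFK g h_ size b) :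
    pvInvB g h_ size n (pvAddE S a b) (altUnion st a b) := by
  have hla : st.1.getD a 0 = ((pvMu S a : Nat) : Int) := hinv.2.2.2.1 a ha hfa
  have hlb : st.1.getD b 0 = ((pvMu S b : Nat) : Int) := hinv.2.2.2.1 b hb hfb
  by_cases heq : pvMu S a = pvMu S b
  · have hstep : altUnion st a b = st := by
      simp only [altUnion, hla, hlb]
      rw [if_pos (by exact_mod_cast heq)]
    rw [hstep]
    have hab : pvCE S a b := (pvMu_eq_iff_conn S a b).2 heq
    have hclass : ∀ k m, pvCE (pvAddE S a b) k m ↔ pvCE S k m := by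
      intro k m
      rw [pvCE_add_iff]
      constructor
      · rintro (h | ⟨h1, h2⟩ | ⟨h1, h2⟩)
        · exact h
        · exact Relation.ReflTransGen.trans h1 (Relation.ReflTransGen.trans hab h2)
        · exact Relation.ReflTransGen.trans h1
            (Relation.ReflTransGen.trans (pvCE_symm S a b hab) h2)
      · exact fun h => Or.inl h
    have hmu : ∀ k, pvMu (pvAddE S a b) k = pvMu S k := fun k =>
      pvMu_eq_of_class_eq _ _ k (hclass k)
    obtain ⟨h1, h2, h3, h4, h5⟩ := hinv
    exact ⟨h1, h2, h3, fun k hk hf => by rw [hmu k]; exact h4 k hk hf,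
      fun r x => by rw [h5 r x, ← hmu x]⟩
  · have hne : st.1.getD a 0 ≠ st.1.getD b 0 := by
      rw [hla, hlb]
      exact_mod_cast heq
    by_cases hba : pvMu S b < pvMu S a
    · have hba' : st.1.getD b 0 < st.1.getD a 0 := by
        rw [hla, hlb]
        exact_mod_cast hba
      have hstep : altUnion st a b =
          (((st.2.getD (pvMu S a) []).foldl
              (fun lab x => lab.set x ((pvMu S b : Nat) : Int)) st.1),
           ((st.2.set (pvMu S b) (st.2.getD (pvMu S b) [] ++ st.2.getD (pvMu S a) [])).set
              (pvMu S a) [])) := by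
        simp only [altUnion, hla, hlb]
        rw [if_neg (by exact_mod_cast heq)]
        simp [hba, Int.toNat_natCast]
      rw [hstep]
      exact pvMerge_inv g h_ size n S st ⟨hinv.1, hinv.2.1, hinv.2.2.1, hinv.2.2.2.1,
        hinv.2.2.2.2⟩ a b ha hb (pvMu S b) (pvMu S a) (Or.inr ⟨rfl, rfl⟩) hba
    · have hab : pvMu S a < pvMu S b := by omega
      have hstep : altUnion st a b =
          (((st.2.getD (pvMu S b) []).foldl
              (fun lab x => lab.set x ((pvMu S a : Nat) : Int)) st.1),
           ((st.2.set (pvMu S a) (st.2.getD (pvMu S a) [] ++ st.2.getD (pvMu S b) [])).set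
              (pvMu S b) [])) := by
        simp only [altUnion, hla, hlb]
        rw [if_neg (by exact_mod_cast heq)]
        simp [hba, Int.toNat_natCast]
      rw [hstep]
      exact pvMerge_inv g h_ size n S st ⟨hinv.1, hinv.2.1, hinv.2.2.1, hinv.2.2.2.1,
        hinv.2.2.2.2⟩ a b ha hb (pvMu S a) (pvMu S b) (Or.inl ⟨rfl, rfl⟩) hab


-- ---- B-side: the processed-edge relation and the scan ----
def pvS (g : List (List Int)) (h_ : Int) (size K : Nat) (a b : Nat) : Prop :=
  ∃ k, k < K ∧ pvFK g h_ size k ∧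
    ((a = k ∧ b = k + 1 ∧ k % size + 1 < size ∧ pvFK g h_ size (k + 1)) ∨
     (a = k ∧ b = k + size ∧ k / size + 1 < size ∧ pvFK g h_ size (k + size)))

def pvBodyB (g : List (List Int)) (h_ : Int) (size : Nat)
    (st : List Int × List (List Nat)) (i j : Nat) : List Int × List (List Nat) :=
  if altVal g (i : Int) (j : Int) > h_ then
    let k : Nat := i * size + j
    let st1 := if j + 1 < size ∧ altVal g (i : Int) ((j : Int) + 1) > h_ then
      altUnion st k (k + 1) else st
    if i + 1 < size ∧ altVal g ((i : Int) + 1) (j : Int) > h_ then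
      altUnion st1 k (k + size) else st1
  else st

theorem pvBodyB_eq (g : List (List Int)) (h_ : Int) (size : Nat)
    (st : List Int × List (List Nat)) (i j : Nat) :
    pvBodyB g h_ size st i j =
      if altVal g (i : Int) (j : Int) > h_ then
        (if i + 1 < size ∧ altVal g ((i : Int) + 1) (j : Int) > h_ then
          altUnion (if j + 1 < size ∧ altVal g (i : Int) ((j : Int) + 1) > h_ then
              altUnion st (i * size + j) (i * size + j + 1) else st)
            (i * size + j) (i * size + j + size)
        else (if j + 1 < size ∧ altVal g (i : Int) ((j : Int) + 1) > h_ then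
          altUnion st (i * size + j) (i * size + j + 1) else st))
      else st := rfl

def pvInitB (g : List (List Int)) (h_ : Int) (size n : Nat) : List Int × List (List Nat) :=
  (List.range n).foldl (fun st k =>
    if altVal g ((k / size : Nat) : Int) ((k % size : Nat) : Int) > h_ then
      (st.1.set k (k : Int), st.2.set k [k])
    else st)
    (List.replicate n (-1), List.replicate n ([] : List Nat))

theorem pvDivMod (size q r : Nat) (hs : 0 < size) (hr : r < size) :
    (size * q + r) / size = q ∧ (size * q + r) % size = r := by
  constructor
  · rw [Nat.mul_add_div hs, Nat.div_eq_of_lt hr, Nat.add_zero]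
  · rw [Nat.mul_add_mod, Nat.mod_eq_of_lt hr]

theorem pvIdx_lt (size i j : Nat) (hi : i < size) (hj : j < size) :
    i * size + j < size * size := by
  calc i * size + j < i * size + size := by omega
    _ = (i + 1) * size := by ring
    _ ≤ size * size := Nat.mul_le_mul_right _ (by omega)

theorem pvSucc_pair (size K : Nat) (hlt : K % size + 1 < size) :
    (K + 1) / size = K / size ∧ (K + 1) % size = K % size + 1 := by
  have hs : 0 < size := lt_of_le_of_lt (Nat.zero_le _) hlt
  have h2 : K + 1 = size * (K / size) + (K % size + 1) := by
    conv_lhs => rw [← Nat.div_add_mod K size]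
    ring
  rw [h2]
  exact pvDivMod size (K / size) (K % size + 1) hs hlt

theorem pvDown_pair (size K : Nat) (hs : 0 < size) :
    (K + size) / size = K / size + 1 ∧ (K + size) % size = K % size := by
  have h2 : K + size = size * (K / size + 1) + K % size := by
    conv_lhs => rw [← Nat.div_add_mod K size]
    ring
  rw [h2]
  exact pvDivMod size (K / size + 1) (K % size) hs (Nat.mod_lt _ hs)

theorem pvPair_inj (size : Nat) (m1 m2 : Nat) (h : pvPair size m1 = pvPair size m2) :
    m1 = m2 := by
  simp only [pvPair, Prod.ext_iff] at h
  have h1 : m1 / size = m2 / size := by omega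
  have h2 : m1 % size = m2 % size := by omega
  calc m1 = size * (m1 / size) + m1 % size := (Nat.div_add_mod _ _).symm
    _ = size * (m2 / size) + m2 % size := by rw [h1, h2]
    _ = m2 := Nat.div_add_mod _ _

theorem pvPair_ord (size : Nat) (p : Int × Int) (hin : pvIn size p) :
    ∃ m, m < size * size ∧ pvPair size m = p := by
  obtain ⟨h1, h2, h3, h4⟩ := hin
  have hs : 0 < size := by omega
  have ha : p.1.toNat < size := by omega
  have hb : p.2.toNat < size := by omega
  refine ⟨p.1.toNat * size + p.2.toNat, pvIdx_lt size _ _ ha hb, ?_⟩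
  have h5 : p.1.toNat * size + p.2.toNat = size * p.1.toNat + p.2.toNat := by ring
  unfold pvPair
  rw [h5, (pvDivMod size _ _ hs hb).1, (pvDivMod size _ _ hs hb).2]
  exact Prod.ext (by omega) (by omega)


theorem pvS_succ (g : List (List Int)) (h_ : Int) (size K a b : Nat) :
    pvS g h_ size (K + 1) a b ↔ (pvS g h_ size K a b ∨
      (pvFK g h_ size K ∧ a = K ∧ b = K + 1 ∧ K % size + 1 < size ∧ pvFK g h_ size (K + 1)) ∨
      (pvFK g h_ size K ∧ a = K ∧ b = K + size ∧ K / size + 1 < size ∧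
        pvFK g h_ size (K + size))) := by
  unfold pvS
  constructor
  · rintro ⟨k, hk, hf, hc⟩
    rcases Nat.lt_succ_iff_lt_or_eq.1 hk with h | rfl
    · exact Or.inl ⟨k, h, hf, hc⟩
    · rcases hc with ⟨h1, h2, h3, h4⟩ | ⟨h1, h2, h3, h4⟩
      · exact Or.inr (Or.inl ⟨hf, h1, h2, h3, h4⟩)
      · exact Or.inr (Or.inr ⟨hf, h1, h2, h3, h4⟩)
  · rintro (⟨k, hk, hf, hc⟩ | ⟨hf, h1, h2, h3, h4⟩ | ⟨hf, h1, h2, h3, h4⟩)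
    · exact ⟨k, by omega, hf, hc⟩
    · exact ⟨K, by omega, hf, Or.inl ⟨h1, h2, h3, h4⟩⟩
    · exact ⟨K, by omega, hf, Or.inr ⟨h1, h2, h3, h4⟩⟩

theorem pvFK_lt (g : List (List Int)) (h_ : Int) (size m : Nat) (hf : pvFK g h_ size m) :
    m < size * size := by
  have h2 : ((m / size : Nat) : Int) < (size : Int) := hf.1.2.1
  have hd : m / size < size := by exact_mod_cast h2
  have hs : 0 < size := lt_of_le_of_lt (Nat.zero_le _) hd
  exact (Nat.div_lt_iff_lt_mul hs).1 hd

theorem pvInitB_char (g : List (List Int)) (h_ : Int) (size : Nat) :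
    ∀ K, K ≤ size * size →
    (((List.range K).foldl (fun st k =>
      if altVal g ((k / size : Nat) : Int) ((k % size : Nat) : Int) > h_ then
        (st.1.set k (k : Int), st.2.set k [k])
      else st)
      (List.replicate (size * size) (-1),
       List.replicate (size * size) ([] : List Nat))).1.length = size * size) ∧
    (((List.range K).foldl (fun st k =>
      if altVal g ((k / size : Nat) : Int) ((k % size : Nat) : Int) > h_ then
        (st.1.set k (k : Int), st.2.set k [k])
      else st)
      (List.replicate (size * size) (-1),
       List.replicate (size * size) ([] : List Nat))).2.length = size * size) ∧
    (∀ k, k < K → pvFK g h_ size k →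
      ((List.range K).foldl (fun st k =>
        if altVal g ((k / size : Nat) : Int) ((k % size : Nat) : Int) > h_ then
          (st.1.set k (k : Int), st.2.set k [k])
        else st)
        (List.replicate (size * size) (-1),
         List.replicate (size * size) ([] : List Nat))).1.getD k 0 = (k : Int)) ∧
    (∀ k, k < size * size → ¬ (k < K ∧ pvFK g h_ size k) →
      ((List.range K).foldl (fun st k =>
        if altVal g ((k / size : Nat) : Int) ((k % size : Nat) : Int) > h_ then
          (st.1.set k (k : Int), st.2.set k [k])
        else st)
        (List.replicate (size * size) (-1),
         List.replicate (size * size) ([] : List Nat))).1.getD k 0 = -1) ∧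
    (∀ k, k < K → pvFK g h_ size k →
      ((List.range K).foldl (fun st k =>
        if altVal g ((k / size : Nat) : Int) ((k % size : Nat) : Int) > h_ then
          (st.1.set k (k : Int), st.2.set k [k])
        else st)
        (List.replicate (size * size) (-1),
         List.replicate (size * size) ([] : List Nat))).2.getD k [] = [k]) ∧
    (∀ k, ¬ (k < K ∧ pvFK g h_ size k) →
      ((List.range K).foldl (fun st k =>
        if altVal g ((k / size : Nat) : Int) ((k % size : Nat) : Int) > h_ then
          (st.1.set k (k : Int), st.2.set k [k])
        else st)
        (List.replicate (size * size) (-1),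
         List.replicate (size * size) ([] : List Nat))).2.getD k [] = []) := by
  intro K
  induction K with
  | zero =>
    intro _
    simp only [List.range_zero, List.foldl_nil]
    refine ⟨by simp, by simp, by omega, ?_, by omega, ?_⟩
    · intro k hk _
      simp [List.getD_eq_getElem?_getD, List.getElem?_replicate, hk]
    · intro k _
      by_cases hk : k < size * size <;>
        simp [List.getD_eq_getElem?_getD, List.getElem?_replicate, hk]
  | succ K ih =>
    intro hK1
    obtain ⟨ih1, ih2, ih3, ih4, ih5, ih6⟩ := ih (by omega)
    rw [List.range_succ, List.foldl_append, List.foldl_cons, List.foldl_nil]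
    have hKn : K < size * size := by omega
    have hin : pvIn size (pvPair size K) := pvPair_in size K hKn
    have hcnd : (altVal g ((K / size : Nat) : Int) ((K % size : Nat) : Int) > h_) ↔
        pvFK g h_ size K := ⟨fun hv => ⟨hin, hv⟩, fun hf => hf.2⟩
    by_cases hfk : pvFK g h_ size K
    · rw [if_pos (hcnd.2 hfk)]
      refine ⟨by simpa using ih1, by simpa using ih2, ?_, ?_, ?_, ?_⟩
      · intro k hk hf
        rw [pvGetD_set_int, ih1]
        rcases Nat.lt_succ_iff_lt_or_eq.1 hk with h | rfl
        · rw [if_neg (by omega), ih3 k h hf]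
        · rw [if_pos ⟨rfl, hKn⟩]
      · intro k hk hnk
        rw [pvGetD_set_int, ih1]
        have hne : ¬ (K = k ∧ K < size * size) := by
          rintro ⟨rfl, -⟩
          exact hnk ⟨by omega, hfk⟩
        rw [if_neg hne]
        exact ih4 k hk (fun h => hnk ⟨by omega, h.2⟩)
      · intro k hk hf
        rw [pvGetD_set, ih2]
        rcases Nat.lt_succ_iff_lt_or_eq.1 hk with h | rfl
        · rw [if_neg (by omega), ih5 k h hf]
        · rw [if_pos ⟨rfl, hKn⟩]
      · intro k hnk
        rw [pvGetD_set, ih2]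
        have hne : ¬ (K = k ∧ K < size * size) := by
          rintro ⟨rfl, -⟩
          exact hnk ⟨by omega, hfk⟩
        rw [if_neg hne]
        exact ih6 k (fun h => hnk ⟨by omega, h.2⟩)
    · rw [if_neg (fun hv => hfk (hcnd.1 hv))]
      refine ⟨ih1, ih2, ?_, ?_, ?_, ?_⟩
      · intro k hk hf
        rcases Nat.lt_succ_iff_lt_or_eq.1 hk with h | rfl
        · exact ih3 k h hf
        · exact absurd hf hfk
      · intro k hk hnk
        exact ih4 k hk (fun h => hnk ⟨by omega, h.2⟩)
      · intro k hk hf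
        rcases Nat.lt_succ_iff_lt_or_eq.1 hk with h | rfl
        · exact ih5 k h hf
        · exact absurd hf hfk
      · intro k hnk
        exact ih6 k (fun h => hnk ⟨by omega, h.2⟩)

theorem pvS_zero (g : List (List Int)) (h_ : Int) (size a b : Nat) :
    pvS g h_ size 0 a b ↔ pvNoE a b := by
  constructor
  · rintro ⟨k, hk, -⟩
    omega
  · exact fun h => h.elim

theorem pvInitB_inv (g : List (List Int)) (h_ : Int) (size : Nat) :
    pvInvB g h_ size (size * size) pvNoE (pvInitB g h_ size (size * size)) := by
  unfold pvInitB
  obtain ⟨h1, h2, h3, h4, h5, h6⟩ := pvInitB_char g h_ size (size * size) (le_refl _)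
  refine ⟨h1, h2, ?_, ?_, ?_⟩
  · intro k hk hnf
    exact h4 k hk (fun h => hnf h.2)
  · intro k hk hf
    rw [pvMu_noE]
    exact h3 k hk hf
  · intro r x
    constructor
    · intro hx
      by_cases hr : r < size * size ∧ pvFK g h_ size r
      · rw [h5 r hr.1 hr.2] at hx
        rw [List.mem_singleton] at hx
        subst hx
        exact ⟨hr.1, hr.2, pvMu_noE x⟩
      · rw [h6 r hr] at hx
        exact absurd hx (List.not_mem_nil)
    · rintro ⟨hxn, hfx, hmu⟩
      rw [pvMu_noE] at hmu
      subst hmu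
      rw [h5 x hxn hfx]
      exact List.mem_singleton.2 rfl

set_option maxHeartbeats 1000000 in
theorem pvScanB (g : List (List Int)) (h_ : Int) (size : Nat) :
    ∀ K, K ≤ size * size →
    pvInvB g h_ size (size * size) (pvS g h_ size K)
      ((List.range K).foldl (fun st k => pvBodyB g h_ size st (k / size) (k % size))
        (pvInitB g h_ size (size * size))) := by
  intro K
  induction K with
  | zero =>
    intro _
    simp only [List.range_zero, List.foldl_nil]
    exact pvInvB_congr g h_ size (size * size) pvNoE (pvS g h_ size 0)
      (fun a b => (pvS_zero g h_ size a b).symm) _ (pvInitB_inv g h_ size)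
  | succ K ih =>
    intro hK1
    have hinv := ih (by omega)
    have hKn : K < size * size := by omega
    have hs : 0 < size := by
      rcases Nat.eq_zero_or_pos size with rfl | h
      · omega
      · exact h
    simp only [List.range_succ, List.foldl_append, List.foldl_cons, List.foldl_nil]
    have hij : (K / size) * size + K % size = K := by
      rw [Nat.mul_comm]
      exact Nat.div_add_mod K size
    have hiS : K / size < size := Nat.div_lt_iff_lt_mul hs |>.2 hKn
    have hjS : K % size < size := Nat.mod_lt _ hs
    have hin : pvIn size (pvPair size K) := pvPair_in size K hKn
    have hvK : (altVal g ((K / size : Nat) : Int) ((K % size : Nat) : Int) > h_) ↔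
        pvFK g h_ size K := ⟨fun hv => ⟨hin, hv⟩, fun hf => hf.2⟩
    have hvR : (K % size + 1 < size ∧ altVal g ((K / size : Nat) : Int)
          (((K % size : Nat) : Int) + 1) > h_) ↔
        (K % size + 1 < size ∧ pvFK g h_ size (K + 1)) := by
      constructor
      · rintro ⟨h1, h2⟩
        have hK1n : K + 1 < size * size := by
          have := pvIdx_lt size (K / size) (K % size + 1) hiS h1
          omega
        have hd := pvSucc_pair size K h1
        refine ⟨h1, pvPair_in size (K + 1) hK1n, ?_⟩
        show solveGetV g (((K + 1) / size : Nat) : Int) (((K + 1) % size : Nat) : Int) > h_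
        rw [hd.1, hd.2]
        exact_mod_cast h2
      · rintro ⟨h1, h2⟩
        have hd := pvSucc_pair size K h1
        refine ⟨h1, ?_⟩
        have hv := h2.2
        show altVal g ((K / size : Nat) : Int) (((K % size : Nat) : Int) + 1) > h_
        have : solveGetV g (((K + 1) / size : Nat) : Int) (((K + 1) % size : Nat) : Int) > h_ := hv
        rw [hd.1, hd.2] at this
        exact_mod_cast this
    have hvD : (K / size + 1 < size ∧ altVal g (((K / size : Nat) : Int) + 1)
          ((K % size : Nat) : Int) > h_) ↔
        (K / size + 1 < size ∧ pvFK g h_ size (K + size)) := by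
      constructor
      · rintro ⟨h1, h2⟩
        have hKsn : K + size < size * size := by
          have h3 := pvIdx_lt size (K / size + 1) (K % size) h1 hjS
          have h4 : (K / size + 1) * size = K / size * size + size := by ring
          omega
        have hd := pvDown_pair size K hs
        refine ⟨h1, pvPair_in size (K + size) hKsn, ?_⟩
        show solveGetV g (((K + size) / size : Nat) : Int) (((K + size) % size : Nat) : Int) > h_
        rw [hd.1, hd.2]
        exact_mod_cast h2
      · rintro ⟨h1, h2⟩
        have hd := pvDown_pair size K hs
        refine ⟨h1, ?_⟩
        have hv := h2.2
        show altVal g (((K / size : Nat) : Int) + 1) ((K % size : Nat) : Int) > h_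
        have : solveGetV g (((K + size) / size : Nat) : Int) (((K + size) % size : Nat) : Int) > h_ := hv
        rw [hd.1, hd.2] at this
        exact_mod_cast this
    rw [pvBodyB_eq]
    by_cases hfk : pvFK g h_ size K
    · rw [if_pos (hvK.2 hfk)]
      simp only [hij]
      by_cases hc1 : K % size + 1 < size ∧ altVal g ((K / size : Nat) : Int)
          (((K % size : Nat) : Int) + 1) > h_
      · obtain ⟨hr1, hfK1⟩ := hvR.1 hc1
        have hK1n : K + 1 < size * size := pvFK_lt g h_ size (K + 1) hfK1
        rw [if_pos hc1]
        have H1 := pvUnion_inv g h_ size (size * size) (pvS g h_ size K) _ hinv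
          K (K + 1) hKn hK1n hfk hfK1
        by_cases hc2 : K / size + 1 < size ∧ altVal g (((K / size : Nat) : Int) + 1)
            ((K % size : Nat) : Int) > h_
        · obtain ⟨hd1, hfKs⟩ := hvD.1 hc2
          have hKsn : K + size < size * size := pvFK_lt g h_ size (K + size) hfKs
          rw [if_pos hc2]
          have H2 := pvUnion_inv g h_ size (size * size)
            (pvAddE (pvS g h_ size K) K (K + 1)) _ H1 K (K + size) hKn hKsn hfk hfKs
          refine pvInvB_congr g h_ size (size * size) _ _ ?_ _ H2
          intro x y
          rw [pvS_succ]
          simp only [pvAddE]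
          constructor
          · rintro ((h | ⟨rfl, rfl⟩) | ⟨rfl, rfl⟩)
            · exact Or.inl h
            · exact Or.inr (Or.inl ⟨hfk, rfl, rfl, hr1, hfK1⟩)
            · exact Or.inr (Or.inr ⟨hfk, rfl, rfl, hd1, hfKs⟩)
          · rintro (h | ⟨-, rfl, rfl, -, -⟩ | ⟨-, rfl, rfl, -, -⟩)
            · exact Or.inl (Or.inl h)
            · exact Or.inl (Or.inr ⟨rfl, rfl⟩)
            · exact Or.inr ⟨rfl, rfl⟩
        · rw [if_neg hc2]
          have hnd : ¬ (K / size + 1 < size ∧ pvFK g h_ size (K + size)) :=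
            fun h => hc2 (hvD.2 h)
          refine pvInvB_congr g h_ size (size * size) _ _ ?_ _ H1
          intro x y
          rw [pvS_succ]
          simp only [pvAddE]
          constructor
          · rintro (h | ⟨rfl, rfl⟩)
            · exact Or.inl h
            · exact Or.inr (Or.inl ⟨hfk, rfl, rfl, hr1, hfK1⟩)
          · rintro (h | ⟨-, rfl, rfl, -, -⟩ | ⟨-, rfl, rfl, h3, h4⟩)
            · exact Or.inl h
            · exact Or.inr ⟨rfl, rfl⟩
            · exact absurd ⟨h3, h4⟩ hnd
      · rw [if_neg hc1]
        have hnr : ¬ (K % size + 1 < size ∧ pvFK g h_ size (K + 1)) :=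
          fun h => hc1 (hvR.2 h)
        by_cases hc2 : K / size + 1 < size ∧ altVal g (((K / size : Nat) : Int) + 1)
            ((K % size : Nat) : Int) > h_
        · obtain ⟨hd1, hfKs⟩ := hvD.1 hc2
          have hKsn : K + size < size * size := pvFK_lt g h_ size (K + size) hfKs
          rw [if_pos hc2]
          have H2 := pvUnion_inv g h_ size (size * size) (pvS g h_ size K) _ hinv
            K (K + size) hKn hKsn hfk hfKs
          refine pvInvB_congr g h_ size (size * size) _ _ ?_ _ H2
          intro x y
          rw [pvS_succ]
          simp only [pvAddE]
          constructor
          · rintro (h | ⟨rfl, rfl⟩)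
            · exact Or.inl h
            · exact Or.inr (Or.inr ⟨hfk, rfl, rfl, hd1, hfKs⟩)
          · rintro (h | ⟨-, rfl, rfl, h3, h4⟩ | ⟨-, rfl, rfl, -, -⟩)
            · exact Or.inl h
            · exact absurd ⟨h3, h4⟩ hnr
            · exact Or.inr ⟨rfl, rfl⟩
        · rw [if_neg hc2]
          have hnd : ¬ (K / size + 1 < size ∧ pvFK g h_ size (K + size)) :=
            fun h => hc2 (hvD.2 h)
          refine pvInvB_congr g h_ size (size * size) _ _ ?_ _ hinv
          intro x y
          rw [pvS_succ]
          constructor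
          · exact fun h => Or.inl h
          · rintro (h | ⟨-, rfl, rfl, h3, h4⟩ | ⟨-, rfl, rfl, h3, h4⟩)
            · exact h
            · exact absurd ⟨h3, h4⟩ hnr
            · exact absurd ⟨h3, h4⟩ hnd
    · rw [if_neg (fun hv => hfk (hvK.1 hv))]
      refine pvInvB_congr g h_ size (size * size) _ _ ?_ _ hinv
      intro x y
      rw [pvS_succ]
      constructor
      · exact fun h => Or.inl h
      · rintro (h | ⟨hf, -⟩ | ⟨hf, -⟩)
        · exact h
        · exact absurd hf hfk
        · exact absurd hf hfk

theorem pvRowsNatN (n : Nat) (hn : 0 < n) (r : Nat) :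
    (List.range (r * n)).map (fun k => (k / n, k % n))
      = (List.range r).flatMap (fun i => (List.range n).map (fun j => (i, j))) := by
  induction r with
  | zero => simp
  | succ r ih =>
    rw [Nat.succ_mul, List.range_add, List.map_append, ih, List.range_succ,
      List.flatMap_append, List.map_map]
    congr 1
    simp only [List.flatMap_singleton, List.map_map]
    apply List.map_congr_left
    intro j hj
    rw [List.mem_range] at hj
    have hd : (r * n + j) / n = r := by
      rw [Nat.add_comm, Nat.mul_comm, Nat.add_mul_div_left _ _ hn]
      simp [Nat.div_eq_of_lt hj]
    have hm : (r * n + j) % n = j := by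
      rw [Nat.add_comm, Nat.mul_comm, Nat.add_mul_mod_self_left, Nat.mod_eq_of_lt hj]
    simp [Function.comp, hd, hm]

theorem pvNestFlat (g : List (List Int)) (h_ : Int) (size : Nat)
    (init : List Int × List (List Nat)) :
    (List.range size).foldl (fun st i => (List.range size).foldl
      (fun st j => pvBodyB g h_ size st i j) st) init
    = (List.range (size * size)).foldl
        (fun st k => pvBodyB g h_ size st (k / size) (k % size)) init := by
  rcases Nat.eq_zero_or_pos size with rfl | hs
  · simp
  · have h1 : (List.range (size * size)).foldl
        (fun st k => pvBodyB g h_ size st (k / size) (k % size)) init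
      = ((List.range (size * size)).map (fun k => (k / size, k % size))).foldl
          (fun st (p : Nat × Nat) => pvBodyB g h_ size st p.1 p.2) init := by
      rw [List.foldl_map]
    rw [h1, pvRowsNatN size hs size, pvFoldl_flatMap]
    simp only [List.foldl_map]

theorem pvSolveB (g : List (List Int)) (h_ : Int) :
    solve_alt g h_ =
      (((List.range (g.length * g.length)).countP (fun k =>
        ((List.range (g.length * g.length)).foldl
          (fun st k => pvBodyB g h_ g.length st (k / g.length) (k % g.length))
          (pvInitB g h_ g.length (g.length * g.length))).1.getD k 0 == (k : Int)) : Nat) : Int) := by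
  show (((List.range (g.length * g.length)).countP (fun k =>
      ((List.range g.length).foldl (fun st i => (List.range g.length).foldl
        (fun st j => pvBodyB g h_ g.length st i j) st)
        (pvInitB g h_ g.length (g.length * g.length))).1.getD k 0 == (k : Int)) : Nat) : Int) = _
  rw [pvNestFlat]

theorem pvEdge_adj (g : List (List Int)) (h_ : Int) (size : Nat) (a b : Nat)
    (h : pvS g h_ size (size * size) a b) :
    pvAdj (pvPair size a) (pvPair size b) ∧ pvAdj (pvPair size b) (pvPair size a) ∧
      pvFK g h_ size a ∧ pvFK g h_ size b := by
  obtain ⟨k, hkK, hfk, hcase⟩ := h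
  rcases hcase with ⟨rfl, rfl, hlt, hfb⟩ | ⟨rfl, rfl, hlt, hfb⟩
  · have hd := pvSucc_pair size a hlt
    have hadj : pvAdj (pvPair size a) (pvPair size (a + 1)) := by
      refine Or.inr (Or.inl ?_)
      simp only [pvPair, hd.1, hd.2, Prod.ext_iff]
      constructor
      · trivial
      · push_cast
        ring
    exact ⟨hadj, (pvAdj_symm _ _).1 hadj, hfk, hfb⟩
  · have hs : 0 < size := lt_of_le_of_lt (Nat.zero_le _) hlt
    have hd := pvDown_pair size a hs
    have hadj : pvAdj (pvPair size a) (pvPair size (a + size)) := by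
      refine Or.inl ?_
      simp only [pvPair, hd.1, hd.2, Prod.ext_iff]
      constructor
      · push_cast
        ring
      · trivial
    exact ⟨hadj, (pvAdj_symm _ _).1 hadj, hfk, hfb⟩

theorem pvRight_edge (g : List (List Int)) (h_ : Int) (size n m : Nat) (hm : m < n)
    (hf1 : pvFK g h_ size m) (hf2 : pvFK g h_ size (m + 1)) (hlt : m % size + 1 < size) :
    pvS g h_ size n m (m + 1) :=
  ⟨m, hm, hf1, Or.inl ⟨rfl, rfl, hlt, hf2⟩⟩

theorem pvDown_edge (g : List (List Int)) (h_ : Int) (size n m : Nat) (hm : m < n)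
    (hf1 : pvFK g h_ size m) (hf2 : pvFK g h_ size (m + size)) (hlt : m / size + 1 < size) :
    pvS g h_ size n m (m + size) :=
  ⟨m, hm, hf1, Or.inr ⟨rfl, rfl, hlt, hf2⟩⟩

theorem pvAdj_edge (g : List (List Int)) (h_ : Int) (size : Nat) (m1 m2 : Nat)
    (h1 : m1 < size * size) (h2 : m2 < size * size)
    (hf1 : pvFK g h_ size m1) (hf2 : pvFK g h_ size m2)
    (hadj : pvAdj (pvPair size m1) (pvPair size m2)) :
    pvSym (pvS g h_ size (size * size)) m1 m2 := by
  have hs : 0 < size := by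
    rcases Nat.eq_zero_or_pos size with rfl | h
    · omega
    · exact h
  have hq1 : m1 / size < size := Nat.div_lt_iff_lt_mul hs |>.2 h1
  have hq2 : m2 / size < size := Nat.div_lt_iff_lt_mul hs |>.2 h2
  have hr1 : m1 % size < size := Nat.mod_lt _ hs
  have hr2 : m2 % size < size := Nat.mod_lt _ hs
  have hrec : ∀ m : Nat, m = size * (m / size) + m % size := fun m => (Nat.div_add_mod _ _).symm
  rcases hadj with hc | hc | hc | hc <;> simp only [pvPair, Prod.ext_iff] at hc
  · -- pvPair m2 = (pvPair m1).1 + 1, .2 : m2 = m1 + size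
    have hdq : m2 / size = m1 / size + 1 := by omega
    have hdr : m2 % size = m1 % size := by omega
    have hm2 : m2 = m1 + size := by
      calc m2 = size * (m2 / size) + m2 % size := hrec m2
        _ = size * (m1 / size + 1) + m1 % size := by rw [hdq, hdr]
        _ = (size * (m1 / size) + m1 % size) + size := by ring
        _ = m1 + size := by rw [← hrec m1]
    subst hm2
    exact Or.inl (pvDown_edge g h_ size _ m1 h1 hf1 hf2 (by omega))
  · -- right neighbour: m2 = m1 + 1
    have hdq : m2 / size = m1 / size := by omega
    have hdr : m2 % size = m1 % size + 1 := by omega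
    have hm2 : m2 = m1 + 1 := by
      calc m2 = size * (m2 / size) + m2 % size := hrec m2
        _ = size * (m1 / size) + (m1 % size + 1) := by rw [hdq, hdr]
        _ = (size * (m1 / size) + m1 % size) + 1 := by ring
        _ = m1 + 1 := by rw [← hrec m1]
    subst hm2
    exact Or.inl (pvRight_edge g h_ size _ m1 h1 hf1 hf2 (by omega))
  · -- up neighbour: m1 = m2 + size
    have hdq : m1 / size = m2 / size + 1 := by omega
    have hdr : m1 % size = m2 % size := by omega
    have hm1 : m1 = m2 + size := by
      calc m1 = size * (m1 / size) + m1 % size := hrec m1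
        _ = size * (m2 / size + 1) + m2 % size := by rw [hdq, hdr]
        _ = (size * (m2 / size) + m2 % size) + size := by ring
        _ = m2 + size := by rw [← hrec m2]
    subst hm1
    exact Or.inr (pvDown_edge g h_ size _ m2 h2 hf2 hf1 (by omega))
  · -- left neighbour: m1 = m2 + 1
    have hdq : m1 / size = m2 / size := by omega
    have hdr : m1 % size = m2 % size + 1 := by omega
    have hm1 : m1 = m2 + 1 := by
      calc m1 = size * (m1 / size) + m1 % size := hrec m1
        _ = size * (m2 / size) + (m2 % size + 1) := by rw [hdq, hdr]
        _ = (size * (m2 / size) + m2 % size) + 1 := by ring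
        _ = m2 + 1 := by rw [← hrec m2]
    subst hm1
    exact Or.inr (pvRight_edge g h_ size _ m2 h2 hf2 hf1 (by omega))


theorem pvCE_iff_conn (g : List (List Int)) (h_ : Int) (size : Nat) (k m : Nat)
    (hk : k < size * size) (hfk : pvFK g h_ size k) (hm : m < size * size) :
    pvCE (pvS g h_ size (size * size)) k m ↔
      pvConn g h_ size (pvPair size k) (pvPair size m) := by
  constructor
  · intro h
    clear hm
    refine ⟨hfk, ?_⟩
    induction h with
    | refl => exact Relation.ReflTransGen.refl
    | @tail p q hp hpq ih =>
      rcases hpq with he | he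
      · obtain ⟨hadj, -, -, hfq⟩ := pvEdge_adj g h_ size p q he
        exact Relation.ReflTransGen.tail ih ⟨hadj, hfq⟩
      · obtain ⟨-, hadj, hfq, -⟩ := pvEdge_adj g h_ size q p he
        exact Relation.ReflTransGen.tail ih ⟨hadj, hfq⟩
  · rintro ⟨-, hr⟩
    suffices hgen : ∀ p', Relation.ReflTransGen (pvStepF g h_ size) (pvPair size k) p' →
        ∃ m', m' < size * size ∧ pvPair size m' = p' ∧ pvFK g h_ size m' ∧
          pvCE (pvS g h_ size (size * size)) k m' by
      obtain ⟨m', hm', hpair, -, hce⟩ := hgen (pvPair size m) hr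
      rwa [pvPair_inj size m' m hpair] at hce
    intro p' hp'
    induction hp' with
    | refl => exact ⟨k, hk, rfl, hfk, Relation.ReflTransGen.refl⟩
    | @tail p q hp hpq ih =>
      obtain ⟨m', hm', hpair, hfm', hce⟩ := ih
      have hfq : pvFlood g h_ size q := hpq.2
      obtain ⟨m2, hm2, hpair2⟩ := pvPair_ord size q hfq.1
      have hfm2 : pvFK g h_ size m2 := by
        rw [pvFK, hpair2]
        exact hfq
      have hadj : pvAdj (pvPair size m') (pvPair size m2) := by
        rw [hpair, hpair2]
        exact hpq.1
      have hedge := pvAdj_edge g h_ size m' m2 hm' hm2 hfm' hfm2 hadj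
      exact ⟨m2, hm2, hpair2, hfm2, Relation.ReflTransGen.tail hce hedge⟩

theorem pvMu_full_iff (g : List (List Int)) (h_ : Int) (size : Nat) (k : Nat)
    (hk : k < size * size) (hfk : pvFK g h_ size k) :
    pvMu (pvS g h_ size (size * size)) k = k ↔ pvCanon g h_ size k := by
  constructor
  · intro hmu
    refine ⟨hfk, ?_⟩
    intro m hmk hconn
    have hm : m < size * size := by omega
    have hce : pvCE (pvS g h_ size (size * size)) k m :=
      (pvCE_iff_conn g h_ size k m hk hfk hm).2 (pvConn_symm g h_ size _ _ hconn)
    have := pvMu_le (pvS g h_ size (size * size)) k m hce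
    omega
  · rintro ⟨-, hcan⟩
    have hle := pvMu_le_self (pvS g h_ size (size * size)) k
    rcases Nat.lt_or_ge (pvMu (pvS g h_ size (size * size)) k) k with hlt | hge
    · exfalso
      have hce := pvMu_mem (pvS g h_ size (size * size)) k
      have hmun : pvMu (pvS g h_ size (size * size)) k < size * size := by omega
      have hconn := (pvCE_iff_conn g h_ size k _ hk hfk hmun).1 hce
      exact hcan _ hlt (pvConn_symm g h_ size _ _ hconn)
    · omega

theorem pvB_eq (g : List (List Int)) (h_ : Int) :
    solve_alt g h_ = ((pvN g h_ g.length : Nat) : Int) := by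
  rw [pvSolveB]
  have hinv := pvScanB g h_ g.length (g.length * g.length) (le_refl _)
  obtain ⟨hl1, hl2, hlab0, hlab, -⟩ := hinv
  unfold pvN
  congr 1
  apply List.countP_congr
  intro k hk
  rw [List.mem_range] at hk
  by_cases hfk : pvFK g h_ g.length k
  · rw [hlab k hk hfk]
    constructor
    · intro hbeq
      have h1 : ((pvMu (pvS g h_ g.length (g.length * g.length)) k : Nat) : Int) = (k : Int) := by
        simpa using hbeq
      have hmu : pvMu (pvS g h_ g.length (g.length * g.length)) k = k := by
        exact_mod_cast h1
      simp only [pvCdec, decide_eq_true_eq]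
      exact (pvMu_full_iff g h_ g.length k hk hfk).1 hmu
    · intro hdec
      simp only [pvCdec, decide_eq_true_eq] at hdec
      have hmu := (pvMu_full_iff g h_ g.length k hk hfk).2 hdec
      rw [hmu]
      simp
  · rw [hlab0 k hk hfk]
    constructor
    · intro hbeq
      exfalso
      have h1 : (-1 : Int) = (k : Int) := by simpa using hbeq
      omega
    · intro hdec
      exfalso
      simp only [pvCdec, decide_eq_true_eq] at hdec
      exact hfk hdec.1

theorem pvMain (g : List (List Int)) (h_ : Int) : solve g h_ = solve_alt g h_ := by
  rw [pvA_eq, pvB_eq]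

-- ===== VERDICT (by name: the statement is the Claim_ definition above) =====
theorem solve_spec : Claim_equal_solve := by
  intro _map h_ _ _
  unfold Spec_solve
  exact pvMain _map h_
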